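-- pv_equiv track=rewrite | github.com/say828/template-fullstack-mono | sdd/99_toolchain/01_automation/build_mobile_screen_ir.py | find_components
-- ===== SOURCE A (Python) =====
-- from collections import deque
--
-- def find_components(mask: list[list[int]]) -> list[tuple[int, int, int, int, int]]:
--     if not mask or not mask[0]:
--         return []
--
--     height = len(mask)
--     width = len(mask[0])
--     seen = [[False] * width for _ in range(height)]
--     components: list[tuple[int, int, int, int, int]] = []
--
--     for y in range(height):
--         for x in range(width):
--             if not mask[y][x] or seen[y][x]:
--                 continue
--             queue: deque[tuple[int, int]] = deque([(x, y)])
--             seen[y][x] = True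
--             area = 0
--             min_x = max_x = x
--             min_y = max_y = y
--
--             while queue:
--                 current_x, current_y = queue.popleft()
--                 area += 1
--                 min_x = min(min_x, current_x)
--                 max_x = max(max_x, current_x)
--                 min_y = min(min_y, current_y)
--                 max_y = max(max_y, current_y)
--                 for next_x in range(max(0, current_x - 1), min(width, current_x + 2)):
--                     for next_y in range(max(0, current_y - 1), min(height, current_y + 2)):
--                         if seen[next_y][next_x] or not mask[next_y][next_x]:
--                             continue
--                         seen[next_y][next_x] = True
--                         queue.append((next_x, next_y))
--
--             components.append((area, min_x, min_y, max_x, max_y))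
--
--     return components
-- ===== SOURCE B (Python) =====
-- def find_components(mask: list[list[int]]) -> list[tuple[int, int, int, int, int]]:
--     if not mask or not mask[0]:
--         return []
--     height = len(mask)
--     width = len(mask[0])
--
--     # union-find over linear indices y*width+x, union by smaller root
--     parent: dict[int, int] = {}
--
--     def find(i: int) -> int:
--         while parent[i] < i:
--             i = parent[i]
--         return i
--
--     # pass 1: union each active cell with its already-seen active neighbours
--     for y in range(height):
--         for x in range(width):
--             if not mask[y][x]:
--                 continue
--             k = y * width + x
--             parent[k] = k
--             for ny, nx in ((y - 1, x - 1), (y - 1, x), (y - 1, x + 1), (y, x - 1)):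
--                 if 0 <= ny and 0 <= nx < width and mask[ny][nx]:
--                     ra = find(k)
--                     rb = find(ny * width + nx)
--                     if ra < rb:
--                         parent[rb] = ra
--                     elif rb < ra:
--                         parent[ra] = rb
--
--     # pass 2: accumulate area/bbox per root, emission order = first encounter
--     stats: dict[int, tuple[int, int, int, int, int]] = {}
--     order: list[int] = []
--     for y in range(height):
--         for x in range(width):
--             if not mask[y][x]:
--                 continue
--             r = find(y * width + x)
--             if r in stats:
--                 a, mnx, mny, mxx, mxy = stats[r]
--                 stats[r] = (a + 1, min(mnx, x), min(mny, y), max(mxx, x), max(mxy, y))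
--             else:
--                 stats[r] = (1, x, y, x, y)
--                 order.append(r)
--     return [stats[r] for r in order]
-- ===== Notes on version B (the rewrite author's own statement) =====
-- stated objective: alternative
-- what changed: B replaces A's per-seed BFS flood fill by a disjoint-set (union-find) labelling: pass 1 unions each active cell with its already-scanned active neighbours (the 4 earlier cells of the 3x3 window), pass 2 aggregates area and bounding box per root in a dict and emits each component at the first row-major cell of its root, which reproduces A's seed order.
import Mathlib
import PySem

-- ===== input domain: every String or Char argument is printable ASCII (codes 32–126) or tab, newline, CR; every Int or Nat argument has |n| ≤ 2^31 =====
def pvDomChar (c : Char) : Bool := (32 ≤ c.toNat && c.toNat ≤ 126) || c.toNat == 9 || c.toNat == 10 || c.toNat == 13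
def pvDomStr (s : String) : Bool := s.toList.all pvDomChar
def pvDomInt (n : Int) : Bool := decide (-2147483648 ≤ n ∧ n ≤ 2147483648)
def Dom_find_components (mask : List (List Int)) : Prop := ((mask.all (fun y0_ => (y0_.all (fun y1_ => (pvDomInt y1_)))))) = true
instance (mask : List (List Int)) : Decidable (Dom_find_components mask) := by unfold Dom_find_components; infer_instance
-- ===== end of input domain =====

-- B replaces A's BFS flood fill by a two-pass union-find labelling (union each active cell with
-- its 4 already-scanned neighbours, then aggregate area/bbox per root, emitting on first encounter).

-- shared 2D-grid helpers (Python's mask[y][x], seen[y][x], seen[y][x] = True; the loops only produce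
-- indices that are in range, where getD is exact)
def pvGetM (mask : List (List Int)) (y x : Int) : Int := (mask.getD y.toNat []).getD x.toNat 0
def pvGetS (s : List (List Bool)) (y x : Int) : Bool := (s.getD y.toNat []).getD x.toNat true
def pvSetS (s : List (List Bool)) (y x : Int) : List (List Bool) :=
  s.set y.toNat ((s.getD y.toNat []).set x.toNat true)
-- number of not-yet-seen entries; the loops' termination measure
def pvUnseen (s : List (List Bool)) : Nat := (s.map (fun r => r.countP (fun b => !b))).sum

lemma pvRow_set_countP (r : List Bool) (x : Nat) (h : r.getD x true = false) :
    (r.set x true).countP (fun b => !b) + 1 = r.countP (fun b => !b) := by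
  induction r generalizing x with
  | nil => simp at h
  | cons b t ih =>
    cases x with
    | zero => cases b <;> simp_all
    | succ x =>
      have := ih x
      cases b <;> simp_all [List.countP_cons]

lemma pvGrid_set_countP (s : List (List Bool)) (j i : Nat)
    (h : (s.getD j []).getD i true = false) :
    ((s.set j ((s.getD j []).set i true)).map (fun r => r.countP (fun b => !b))).sum + 1
      = (s.map (fun r => r.countP (fun b => !b))).sum := by
  induction s generalizing j with
  | nil => simp at h
  | cons r t ih =>
    cases j with
    | zero =>
      simp only [List.getD_cons_zero] at h
      have := pvRow_set_countP r i h
      simp only [List.getD_cons_zero, List.set_cons_zero, List.map_cons, List.sum_cons]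
      omega
    | succ j =>
      simp only [List.getD_cons_succ] at h
      have := ih j h
      simp only [List.getD_cons_succ, List.set_cons_succ, List.map_cons, List.sum_cons]
      omega

lemma pvSetS_unseen (s : List (List Bool)) (y x : Int) (h : pvGetS s y x = false) :
    pvUnseen (pvSetS s y x) + 1 = pvUnseen s := by
  unfold pvGetS at h
  unfold pvSetS pvUnseen
  exact pvGrid_set_countP s y.toNat x.toNat h

lemma pvFoldl_m_eq {α σ : Type} (m : σ → Nat) (f : σ → α → σ)
    (h : ∀ st a, m (f st a) = m st) : ∀ (L : List α) (st : σ), m (L.foldl f st) = m st := by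
  intro L
  induction L with
  | nil => intro st; rfl
  | cons a t ih => intro st; rw [List.foldl_cons, ih, h]

-- ===== PORT A =====
-- inner neighbour scan of A: for next_x …: for next_y …: mark & append to the queue's tail
def bfsNbrs (mask : List (List Int)) (height width cx cy : Int)
    (st : List (List Bool) × List (Int × Int)) : List (List Bool) × List (Int × Int) :=
  (PySem.List.pyRange (max 0 (cx - 1)) (min width (cx + 2)) 1).foldl (fun st1 nx =>
    (PySem.List.pyRange (max 0 (cy - 1)) (min height (cy + 2)) 1).foldl (fun st2 ny =>
      if pvGetS st2.1 ny nx || pvGetM mask ny nx == 0 then st2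
      else (pvSetS st2.1 ny nx, st2.2 ++ [(nx, ny)])) st1) st

lemma bfsNbrs_m (mask : List (List Int)) (height width cx cy : Int)
    (st : List (List Bool) × List (Int × Int)) :
    pvUnseen (bfsNbrs mask height width cx cy st).1 + (bfsNbrs mask height width cx cy st).2.length
      = pvUnseen st.1 + st.2.length := by
  unfold bfsNbrs
  refine pvFoldl_m_eq (fun st => pvUnseen st.1 + st.2.length) _ (fun st1 nx => ?_) _ st
  refine pvFoldl_m_eq (fun st => pvUnseen st.1 + st.2.length) _ (fun st2 ny => ?_) _ st1
  split
  · rfl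
  · rename_i hc
    simp only [Bool.or_eq_true, beq_iff_eq, not_or] at hc
    have := pvSetS_unseen st2.1 ny nx (by
      cases hg : pvGetS st2.1 ny nx
      · rfl
      · exact absurd (Or.inl hg) (by simpa using hc))
    simp only [List.length_append, List.length_cons, List.length_nil]
    omega

-- A's while-loop: BFS popping the queue's head, accumulators updated in place
def loopA (mask : List (List Int)) (height width : Int) (seen : List (List Bool))
    (queue : List (Int × Int)) (area mnx mxx mny mxy : Int) :
    (Int × Int × Int × Int × Int) × List (List Bool) :=
  match queue with
  | [] => ((area, mnx, mny, mxx, mxy), seen)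
  | (cx, cy) :: rest =>
    loopA mask height width (bfsNbrs mask height width cx cy (seen, rest)).1
      (bfsNbrs mask height width cx cy (seen, rest)).2
      (area + 1) (min mnx cx) (max mxx cx) (min mny cy) (max mxy cy)
  termination_by pvUnseen seen + queue.length
  decreasing_by
    have h1 : pvUnseen (bfsNbrs mask height width cx cy (seen, rest)).1
        + (bfsNbrs mask height width cx cy (seen, rest)).2.length
        = pvUnseen seen + rest.length := by simpa using bfsNbrs_m mask height width cx cy (seen, rest)
    simp only [List.length_cons]
    omega

def find_components (mask : List (List Int)) : List (Int × Int × Int × Int × Int) :=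
  if mask.isEmpty || (mask.headD []).isEmpty then []
  else
    let height : Int := mask.length
    let width : Int := (mask.headD []).length
    let seen0 : List (List Bool) :=
      (PySem.List.pyRange 0 height 1).map (fun _ => PySem.List.pyRepeat [false] width)
    let r := (PySem.List.pyRange 0 height 1).foldl (fun st y =>
      (PySem.List.pyRange 0 width 1).foldl (fun st2 x =>
        if pvGetM mask y x == 0 || pvGetS st2.1 y x then st2
        else
          let st3 := loopA mask height width (pvSetS st2.1 y x) [(x, y)] 0 x x y y
          (st3.2, st2.2 ++ [st3.1])) st) (seen0, ([] : List (Int × Int × Int × Int × Int)))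
    r.2

-- ===== PORT B =====
-- B's find: 'while parent[i] < i: i = parent[i]'.  parent[i] is read as getD i i (exact: find is
-- only called on present keys and follows present keys); the extra '0 ≤ p' in the guard is needed
-- for termination and is exact because every stored parent is a nonnegative key.
def ufFind (d : PySem.Dict Int Int) (i : Int) : Int :=
  let p := PySem.Dict.getD d i i
  if _h : 0 ≤ p ∧ p < i then ufFind d p else i
  termination_by i.toNat
  decreasing_by omega

def find_components_alt (mask : List (List Int)) : List (Int × Int × Int × Int × Int) :=
  if mask.isEmpty || (mask.headD []).isEmpty then []
  else
    let height : Int := mask.length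
    let width : Int := (mask.headD []).length
    -- pass 1: union each active cell with its already-scanned active neighbours
    let par := (PySem.List.pyRange 0 height 1).foldl (fun d y =>
      (PySem.List.pyRange 0 width 1).foldl (fun d2 x =>
        if pvGetM mask y x == 0 then d2
        else
          [(y - 1, x - 1), (y - 1, x), (y - 1, x + 1), (y, x - 1)].foldl
            (fun d3 (c : Int × Int) =>
              if 0 ≤ c.1 && (0 ≤ c.2 && c.2 < width) && !(pvGetM mask c.1 c.2 == 0) then
                let ra := ufFind d3 (y * width + x)
                let rb := ufFind d3 (c.1 * width + c.2)
                if ra < rb then PySem.Dict.insert d3 rb ra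
                else if rb < ra then PySem.Dict.insert d3 ra rb
                else d3
              else d3)
            (PySem.Dict.insert d2 (y * width + x) (y * width + x))) d)
      (PySem.Dict.empty : PySem.Dict Int Int)
    -- pass 2: per-root area/bbox in a dict, roots listed in first-encounter order
    let r := (PySem.List.pyRange 0 height 1).foldl (fun st y =>
      (PySem.List.pyRange 0 width 1).foldl
        (fun (st2 : PySem.Dict Int (Int × Int × Int × Int × Int) × List Int) x =>
          if pvGetM mask y x == 0 then st2
          else
            let rt := ufFind par (y * width + x)
            match PySem.Dict.get? st2.1 rt with
            | some (a, mnx, mny, mxx, mxy) =>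
              (PySem.Dict.insert st2.1 rt (a + 1, min mnx x, min mny y, max mxx x, max mxy y), st2.2)
            | none => (PySem.Dict.insert st2.1 rt (1, x, y, x, y), st2.2 ++ [rt])) st)
      ((PySem.Dict.empty : PySem.Dict Int (Int × Int × Int × Int × Int)), ([] : List Int))
    -- stats[r]: the key is always present, so getD is exact
    r.2.map (fun rt => PySem.Dict.getD r.1 rt (0, 0, 0, 0, 0))

-- ===== PRECONDITION & SPEC =====
-- Pre_ excludes exactly the jagged masks on which the Python A raises IndexError: some row shorter
-- than the first row (B raises on the same inputs).
def Pre_find_components (mask : List (List Int)) : Prop :=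
  ∀ r ∈ mask, (mask.headD []).length ≤ r.length
instance (mask : List (List Int)) : Decidable (Pre_find_components mask) := by
  unfold Pre_find_components; infer_instance
def pvWitness_find_components : List (List Int) := [[1, 0, 1], [0, 1, 0]]

def Spec_find_components (mask : List (List Int)) (out : List (Int × Int × Int × Int × Int)) : Prop :=
  out = find_components_alt mask
instance (mask : List (List Int)) (out : List (Int × Int × Int × Int × Int)) :
    Decidable (Spec_find_components mask out) := by unfold Spec_find_components; infer_instance

-- ===== CLAIM (what is proved, stated in full; the proofs are below) =====
def Claim_equal_find_components : Prop := ∀ (mask : List (List Int)), Dom_find_components mask →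
  Pre_find_components mask → Spec_find_components mask (find_components mask)

-- ===== LEMMAS AND PROOFS =====

-- ---------- reused grid machinery (point lemmas about marking) ----------
lemma pvGetS_set_self (s : List (List Bool)) (y x : Int) : pvGetS (pvSetS s y x) y x = true := by
  unfold pvGetS pvSetS
  simp only [List.getD_eq_getElem?_getD]
  by_cases hy : y.toNat < s.length
  · rw [List.getElem?_set_self hy, Option.getD_some]
    by_cases hx : x.toNat < (s[y.toNat]?.getD []).length
    · rw [List.getElem?_set_self hx]; rfl
    · rw [List.getElem?_eq_none (by rw [List.length_set]; exact Nat.le_of_not_lt hx), Option.getD_none]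
  · rw [List.set_eq_of_length_le (l := s) (Nat.le_of_not_lt hy), List.getElem?_eq_none (Nat.le_of_not_lt hy)]
    rfl

lemma pvGetS_set_ne (s : List (List Bool)) (y x y' x' : Int)
    (h : ¬(y'.toNat = y.toNat ∧ x'.toNat = x.toNat)) :
    pvGetS (pvSetS s y x) y' x' = pvGetS s y' x' := by
  unfold pvGetS pvSetS
  simp only [List.getD_eq_getElem?_getD]
  by_cases hy : y'.toNat = y.toNat
  · have hx : x'.toNat ≠ x.toNat := fun hx => h ⟨hy, hx⟩
    rw [hy]
    by_cases hyr : y.toNat < s.length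
    · rw [List.getElem?_set_self hyr, Option.getD_some, List.getElem?_set_ne (Ne.symm hx)]
    · rw [List.set_eq_of_length_le (l := s) (Nat.le_of_not_lt hyr)]
  · rw [List.getElem?_set_ne (Ne.symm hy)]

def pvMarks (s : List (List Bool)) (L : List (Int × Int)) : List (List Bool) :=
  L.foldl (fun t c => pvSetS t c.2 c.1) s

def pvNN (q : List (Int × Int)) : Prop := ∀ c ∈ q, 0 ≤ c.1 ∧ 0 ≤ c.2

lemma pvGetS_marks (L : List (Int × Int)) (s : List (List Bool)) (x y : Int)
    (hnn : pvNN L) (hx : 0 ≤ x) (hy : 0 ≤ y) :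
    pvGetS (pvMarks s L) y x = (pvGetS s y x || L.contains (x, y)) := by
  induction L generalizing s with
  | nil => simp [pvMarks]
  | cons c t ih =>
    have hc := hnn c (by simp)
    have ht : pvNN t := fun d hd => hnn d (by simp [hd])
    show pvGetS (pvMarks (pvSetS s c.2 c.1) t) y x = _
    rw [ih _ ht]
    by_cases hceq : c = (x, y)
    · subst hceq
      simp [pvGetS_set_self]
    · rw [pvGetS_set_ne _ _ _ _ _ (by
        rintro ⟨h1, h2⟩
        exact hceq (Prod.ext (by omega) (by omega)).symm)]
      have hne2 : ¬((x, y) = c) := fun hp => hceq hp.symm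
      simp [hne2]

-- ---------- A's inner double loop as a selection over the candidate list ----------
def pvNbrsA (height width cx cy : Int) : List (Int × Int) :=
  (PySem.List.pyRange (max 0 (cx - 1)) (min width (cx + 2)) 1).flatMap (fun nx =>
    (PySem.List.pyRange (max 0 (cy - 1)) (min height (cy + 2)) 1).map (fun ny => (nx, ny)))

def pvSel (mask : List (List Int)) (s : List (List Bool)) (L : List (Int × Int)) : List (Int × Int) :=
  L.filter (fun c => !pvGetS s c.2 c.1 && !(pvGetM mask c.2 c.1 == 0))

lemma mem_pvNbrsA (height width cx cy : Int) (c : Int × Int) :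
    c ∈ pvNbrsA height width cx cy ↔
      (max 0 (cx - 1) ≤ c.1 ∧ c.1 < min width (cx + 2)) ∧
      (max 0 (cy - 1) ≤ c.2 ∧ c.2 < min height (cy + 2)) := by
  cases c with
  | mk a b =>
    simp only [pvNbrsA, List.mem_flatMap, List.mem_map, PySem.List.mem_pyRange_one,
      Prod.mk.injEq]
    constructor
    · rintro ⟨nx, hnx, ny, hny, rfl, rfl⟩; exact ⟨hnx, hny⟩
    · rintro ⟨h1, h2⟩; exact ⟨a, h1, b, h2, rfl, rfl⟩

lemma pvNbrsA_nodup (height width cx cy : Int) : (pvNbrsA height width cx cy).Nodup := by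
  rw [pvNbrsA, List.nodup_flatMap]
  refine ⟨fun nx _ => (PySem.List.nodup_pyRange_one _ _).map (fun a b h => by simpa using h), ?_⟩
  refine (PySem.List.pairwise_lt_pyRange_one _ _).imp ?_
  intro a b hab c hca hcb
  simp only [List.mem_map] at hca hcb
  obtain ⟨_, _, rfl⟩ := hca
  obtain ⟨_, _, h⟩ := hcb
  exact absurd (congrArg Prod.fst h) (by simp; omega)

lemma pvNbrsA_nn (height width cx cy : Int) : pvNN (pvNbrsA height width cx cy) := by
  intro c hc
  rw [mem_pvNbrsA] at hc
  omega

lemma pvSel_sublist (mask : List (List Int)) (s : List (List Bool)) (L : List (Int × Int)) :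
    (pvSel mask s L).Sublist L := List.filter_sublist
lemma pvSel_nodup (mask : List (List Int)) (s : List (List Bool)) (L : List (Int × Int))
    (h : L.Nodup) : (pvSel mask s L).Nodup := h.sublist (pvSel_sublist mask s L)
lemma pvSel_nn (mask : List (List Int)) (s : List (List Bool)) (L : List (Int × Int))
    (h : pvNN L) : pvNN (pvSel mask s L) :=
  fun c hc => h c ((pvSel_sublist mask s L).mem hc)
lemma pvSel_mem (mask : List (List Int)) (s : List (List Bool)) (L : List (Int × Int))
    (c : Int × Int) : c ∈ pvSel mask s L ↔
      c ∈ L ∧ pvGetS s c.2 c.1 = false ∧ pvGetM mask c.2 c.1 ≠ 0 := by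
  simp [pvSel, List.mem_filter]

lemma pvMarks_m (mask : List (List Int)) (s : List (List Bool)) (L : List (Int × Int))
    (hnd : L.Nodup) (hnn : pvNN L) (hun : ∀ c ∈ L, pvGetS s c.2 c.1 = false) :
    pvUnseen (pvMarks s L) + L.length = pvUnseen s := by
  induction L generalizing s with
  | nil => rfl
  | cons c t ih =>
    have hc := hnn c (by simp)
    have hct : c ∉ t := (List.nodup_cons.1 hnd).1
    have hndt : t.Nodup := (List.nodup_cons.1 hnd).2
    show pvUnseen (pvMarks (pvSetS s c.2 c.1) t) + (c :: t).length = pvUnseen s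
    have h1 := pvSetS_unseen s c.2 c.1 (hun c (by simp))
    have h2 : ∀ d ∈ t, pvGetS (pvSetS s c.2 c.1) d.2 d.1 = false := by
      intro d hd
      have hdn := hnn d (by simp [hd])
      rw [pvGetS_set_ne _ _ _ _ _ (by
        rintro ⟨e1, e2⟩
        exact hct (by
          have : d = c := Prod.ext (by omega) (by omega)
          rwa [this] at hd))]
      exact hun d (by simp [hd])
    have h3 := ih (pvSetS s c.2 c.1) hndt (fun d hd => hnn d (by simp [hd])) h2
    simp only [List.length_cons]
    omega

lemma pvSel_marks_m (mask : List (List Int)) (s : List (List Bool)) (L : List (Int × Int))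
    (hnd : L.Nodup) (hnn : pvNN L) :
    pvUnseen (pvMarks s (pvSel mask s L)) + (pvSel mask s L).length = pvUnseen s :=
  pvMarks_m mask s _ (pvSel_nodup mask s L hnd) (pvSel_nn mask s L hnn)
    (fun c hc => ((pvSel_mem mask s L c).1 hc).2.1)

-- one-cell step function of A's inner scan
def pvStepA (mask : List (List Int)) (st : List (List Bool) × List (Int × Int)) (c : Int × Int) :
    List (List Bool) × List (Int × Int) :=
  if pvGetS st.1 c.2 c.1 || pvGetM mask c.2 c.1 == 0 then st
  else (pvSetS st.1 c.2 c.1, st.2 ++ [c])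

lemma pvFoldl_flatMap {a b s : Type} (L : List a) (g : a → List b) (f : s → b → s) (init : s) :
    (L.flatMap g).foldl f init = L.foldl (fun st x => (g x).foldl f st) init := by
  simp [List.flatMap_def, List.foldl_flatten, List.foldl_map]

lemma pvSel_set (mask : List (List Int)) (s : List (List Bool)) (t : List (Int × Int))
    (c : Int × Int) (hc : 0 ≤ c.1 ∧ 0 ≤ c.2) (hnn : pvNN t) (hct : c ∉ t) :
    pvSel mask (pvSetS s c.2 c.1) t = pvSel mask s t := by
  unfold pvSel
  refine List.filter_congr (fun d hd => ?_)
  have hdn := hnn d hd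
  rw [pvGetS_set_ne _ _ _ _ _ (by
    rintro ⟨e1, e2⟩
    exact hct (by
      have : d = c := Prod.ext (by omega) (by omega)
      rwa [this] at hd))]

lemma pvFoldl_stepA (mask : List (List Int)) (L : List (Int × Int)) (hnd : L.Nodup)
    (hnn : pvNN L) (s : List (List Bool)) (q : List (Int × Int)) :
    L.foldl (pvStepA mask) (s, q) = (pvMarks s (pvSel mask s L), q ++ pvSel mask s L) := by
  induction L generalizing s q with
  | nil => simp [pvSel, pvMarks]
  | cons c t ih =>
    have hc := hnn c (by simp)
    have hct : c ∉ t := (List.nodup_cons.1 hnd).1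
    have hndt : t.Nodup := (List.nodup_cons.1 hnd).2
    have hnnt : pvNN t := fun d hd => hnn d (by simp [hd])
    rw [List.foldl_cons]
    by_cases hcond : (pvGetS s c.2 c.1 || pvGetM mask c.2 c.1 == 0) = true
    · have hsel : pvSel mask s (c :: t) = pvSel mask s t := by
        unfold pvSel
        rw [List.filter_cons_of_neg (by
          cases hg : pvGetS s c.2 c.1 <;> cases hm : pvGetM mask c.2 c.1 == 0 <;> simp_all)]
      rw [hsel, show pvStepA mask (s, q) c = (s, q) by simp [pvStepA, hcond]]
      exact ih hndt hnnt s q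
    · have hsel : pvSel mask s (c :: t) = c :: pvSel mask s t := by
        unfold pvSel
        rw [List.filter_cons_of_pos (by
          cases hg : pvGetS s c.2 c.1 <;> cases hm : pvGetM mask c.2 c.1 == 0 <;> simp_all)]
      rw [show pvStepA mask (s, q) c = (pvSetS s c.2 c.1, q ++ [c]) by simp [pvStepA, hcond]]
      rw [ih hndt hnnt _ _, hsel]
      rw [pvSel_set mask s t c hc hnnt hct]
      rw [Prod.mk.injEq]
      exact ⟨rfl, by simp⟩

lemma bfsNbrs_eq (mask : List (List Int)) (height width cx cy : Int)
    (s : List (List Bool)) (q : List (Int × Int)) :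
    bfsNbrs mask height width cx cy (s, q)
      = (pvMarks s (pvSel mask s (pvNbrsA height width cx cy)),
         q ++ pvSel mask s (pvNbrsA height width cx cy)) := by
  have h1 : bfsNbrs mask height width cx cy (s, q)
      = (pvNbrsA height width cx cy).foldl (pvStepA mask) (s, q) := by
    rw [pvNbrsA, pvFoldl_flatMap]
    simp only [List.foldl_map]
    rfl
  rw [h1, pvFoldl_stepA mask _ (pvNbrsA_nodup _ _ _ _) (pvNbrsA_nn _ _ _ _)]

-- reference machine: pop the head, push the A-selection at the tail, collect the popped cells
def pvRun (mask : List (List Int)) (height width : Int) (seen : List (List Bool))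
    (queue : List (Int × Int)) : List (Int × Int) × List (List Bool) :=
  match queue with
  | [] => ([], seen)
  | (cx, cy) :: rest =>
    ((cx, cy) :: (pvRun mask height width
        (pvMarks seen (pvSel mask seen (pvNbrsA height width cx cy)))
        (rest ++ pvSel mask seen (pvNbrsA height width cx cy))).1,
     (pvRun mask height width
        (pvMarks seen (pvSel mask seen (pvNbrsA height width cx cy)))
        (rest ++ pvSel mask seen (pvNbrsA height width cx cy))).2)
  termination_by pvUnseen seen + queue.length
  decreasing_by
    have h1 := pvSel_marks_m mask seen (pvNbrsA height width cx cy)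
      (pvNbrsA_nodup _ _ _ _) (pvNbrsA_nn _ _ _ _)
    simp only [List.length_append, List.length_cons]
    omega

def pvPush (mask : List (List Int)) (height width : Int) (s : List (List Bool))
    (c : Int × Int) : List (Int × Int) := pvSel mask s (pvNbrsA height width c.1 c.2)
def pvNext (mask : List (List Int)) (height width : Int) (s : List (List Bool))
    (c : Int × Int) : List (List Bool) := pvMarks s (pvPush mask height width s c)

lemma pvRun_cons (mask : List (List Int)) (height width : Int) (s : List (List Bool))
    (c : Int × Int) (rest : List (Int × Int)) :
    pvRun mask height width s (c :: rest)
      = (c :: (pvRun mask height width (pvNext mask height width s c)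
            (rest ++ pvPush mask height width s c)).1,
         (pvRun mask height width (pvNext mask height width s c)
            (rest ++ pvPush mask height width s c)).2) := by
  obtain ⟨cx, cy⟩ := c
  rw [pvRun, pvNext, pvPush]

lemma pvPush_nodup (mask : List (List Int)) (height width : Int) (s : List (List Bool))
    (c : Int × Int) : (pvPush mask height width s c).Nodup :=
  pvSel_nodup mask s _ (pvNbrsA_nodup _ _ _ _)
lemma pvPush_nn (mask : List (List Int)) (height width : Int) (s : List (List Bool))
    (c : Int × Int) : pvNN (pvPush mask height width s c) :=
  pvSel_nn mask s _ (pvNbrsA_nn _ _ _ _)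
lemma pvPush_m (mask : List (List Int)) (height width : Int) (s : List (List Bool))
    (c : Int × Int) :
    pvUnseen (pvNext mask height width s c) + (pvPush mask height width s c).length = pvUnseen s :=
  pvSel_marks_m mask s _ (pvNbrsA_nodup _ _ _ _) (pvNbrsA_nn _ _ _ _)
lemma mem_pvPush (mask : List (List Int)) (height width : Int) (s : List (List Bool))
    (c d : Int × Int) : d ∈ pvPush mask height width s c ↔
      d ∈ pvNbrsA height width c.1 c.2 ∧ pvGetS s d.2 d.1 = false ∧ pvGetM mask d.2 d.1 ≠ 0 :=
  pvSel_mem mask s _ d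

-- A's accumulator updates, replayed over a popped-cell list
def pvAgg (area mnx mxx mny mxy : Int) : List (Int × Int) → Int × Int × Int × Int × Int
  | [] => (area, mnx, mny, mxx, mxy)
  | c :: t => pvAgg (area + 1) (min mnx c.1) (max mxx c.1) (min mny c.2) (max mxy c.2) t

lemma loopA_eq (mask : List (List Int)) (height width : Int) :
    ∀ (n : Nat) (s : List (List Bool)) (q : List (Int × Int)) (area mnx mxx mny mxy : Int),
    pvUnseen s + q.length = n →
    loopA mask height width s q area mnx mxx mny mxy
      = (pvAgg area mnx mxx mny mxy (pvRun mask height width s q).1,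
         (pvRun mask height width s q).2) := by
  intro n
  induction n using Nat.strong_induction_on with
  | _ n ih =>
    intro s q area mnx mxx mny mxy hm
    cases q with
    | nil =>
      rw [loopA, pvRun]
      rfl
    | cons c rest =>
      obtain ⟨cx, cy⟩ := c
      rw [loopA, pvRun_cons, bfsNbrs_eq]
      have hsel := pvSel_marks_m mask s (pvNbrsA height width cx cy)
        (pvNbrsA_nodup _ _ _ _) (pvNbrsA_nn _ _ _ _)
      have hrec := ih _ (by
          simp only [List.length_cons] at hm
          simp only [List.length_append]
          omega)
        (pvMarks s (pvSel mask s (pvNbrsA height width cx cy)))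
        (rest ++ pvSel mask s (pvNbrsA height width cx cy))
        (area + 1) (min mnx cx) (max mxx cx) (min mny cy) (max mxy cy) rfl
      simp only [pvNext, pvPush] at *
      rw [hrec]
      rfl

lemma pvAgg_spec : ∀ (l : List (Int × Int)) (area mnx mxx mny mxy : Int),
    pvAgg area mnx mxx mny mxy l
      = (area + (l.length : Int), (l.map Prod.fst).foldl min mnx,
         (l.map Prod.snd).foldl min mny, (l.map Prod.fst).foldl max mxx,
         (l.map Prod.snd).foldl max mxy) := by
  intro l
  induction l with
  | nil => intro area mnx mxx mny mxy; simp [pvAgg]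
  | cons c t ih =>
    intro area mnx mxx mny mxy
    rw [show pvAgg area mnx mxx mny mxy (c :: t)
        = pvAgg (area + 1) (min mnx c.1) (max mxx c.1) (min mny c.2) (max mxy c.2) t from rfl]
    rw [ih]
    simp only [List.map_cons, List.foldl_cons, List.length_cons]
    rw [Prod.mk.injEq]
    refine ⟨by push_cast; ring, rfl⟩

-- ---------- the 8-connectivity graph on active cells (cells are (x, y)) ----------
def pvInGrid (H W : Int) (c : Int × Int) : Prop := 0 ≤ c.1 ∧ c.1 < W ∧ 0 ≤ c.2 ∧ c.2 < H
def pvAct (mask : List (List Int)) (H W : Int) (c : Int × Int) : Prop :=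
  pvInGrid H W c ∧ pvGetM mask c.2 c.1 ≠ 0
def pvAdj (mask : List (List Int)) (H W : Int) (a b : Int × Int) : Prop :=
  pvAct mask H W a ∧ pvAct mask H W b ∧
    b.1 ≤ a.1 + 1 ∧ a.1 - 1 ≤ b.1 ∧ b.2 ≤ a.2 + 1 ∧ a.2 - 1 ≤ b.2
def pvConn (mask : List (List Int)) (H W : Int) (a b : Int × Int) : Prop :=
  Relation.ReflTransGen (pvAdj mask H W) a b

lemma pvAdj_symm (mask : List (List Int)) (H W : Int) (a b : Int × Int)
    (h : pvAdj mask H W a b) : pvAdj mask H W b a := by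
  obtain ⟨h1, h2, h3⟩ := h
  exact ⟨h2, h1, by omega⟩

lemma pvConn_symm (mask : List (List Int)) (H W : Int) (a b : Int × Int)
    (h : pvConn mask H W a b) : pvConn mask H W b a := by
  induction h with
  | refl => exact Relation.ReflTransGen.refl
  | tail _ hadj ih =>
    exact Relation.ReflTransGen.trans (Relation.ReflTransGen.single (pvAdj_symm _ _ _ _ _ hadj)) ih

lemma pvConn_act (mask : List (List Int)) (H W : Int) (a b : Int × Int)
    (ha : pvAct mask H W a) (h : pvConn mask H W a b) : pvAct mask H W b := by
  induction h with
  | refl => exact ha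
  | tail _ hadj _ => exact hadj.2.1

-- ---------- BFS characterisation: what pvRun pops and marks ----------
theorem pvRunMega (mask : List (List Int)) (H W : Int) :
  ∀ (n : Nat) (s : List (List Bool)) (q : List (Int × Int)),
    pvUnseen s + q.length = n →
    (∀ c ∈ q, 0 ≤ c.1 ∧ 0 ≤ c.2 ∧ pvGetS s c.2 c.1 = true) →
    q.Nodup →
    (∀ d ∈ (pvRun mask H W s q).1, 0 ≤ d.1 ∧ 0 ≤ d.2) ∧
    (∀ d ∈ (pvRun mask H W s q).1, d ∈ q ∨ pvGetS s d.2 d.1 = false) ∧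
    (∀ c ∈ q, c ∈ (pvRun mask H W s q).1) ∧
    (∀ c : Int × Int, 0 ≤ c.1 → 0 ≤ c.2 →
      pvGetS (pvRun mask H W s q).2 c.2 c.1
        = (pvGetS s c.2 c.1 || decide (c ∈ (pvRun mask H W s q).1))) ∧
    (pvRun mask H W s q).1.Nodup ∧
    ((∀ c ∈ q, pvAct mask H W c) → ∀ d ∈ (pvRun mask H W s q).1,
        ∃ c ∈ q, pvConn mask H W c d) ∧
    (∀ c ∈ (pvRun mask H W s q).1, ∀ d, pvAdj mask H W c d →
        pvGetS (pvRun mask H W s q).2 d.2 d.1 = true) := by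
  intro n
  induction n using Nat.strong_induction_on with
  | _ n ih =>
    intro s q hm hq hnd
    cases q with
    | nil =>
      rw [pvRun]
      refine ⟨by simp, by simp, by simp, by simp, by simp, by simp, by simp⟩
    | cons c0 rest =>
      obtain ⟨cx, cy⟩ := c0
      rw [pvRun_cons]
      have hc0 := hq (cx, cy) List.mem_cons_self
      have hrest : ∀ c ∈ rest, 0 ≤ c.1 ∧ 0 ≤ c.2 ∧ pvGetS s c.2 c.1 = true :=
        fun c hcm => hq c (List.mem_cons_of_mem _ hcm)
      have hrestnd : rest.Nodup := (List.nodup_cons.1 hnd).2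
      have hcnotr : (cx, cy) ∉ rest := (List.nodup_cons.1 hnd).1
      have hPnn := pvPush_nn mask H W s (cx, cy)
      have hPnd := pvPush_nodup mask H W s (cx, cy)
      have hPm := pvPush_m mask H W s (cx, cy)
      have hs' : ∀ d : Int × Int, 0 ≤ d.1 → 0 ≤ d.2 →
          pvGetS (pvNext mask H W s (cx, cy)) d.2 d.1
            = (pvGetS s d.2 d.1 || decide (d ∈ pvPush mask H W s (cx, cy))) := by
        intro d h1 h2
        have h := pvGetS_marks (pvPush mask H W s (cx, cy)) s d.1 d.2 hPnn h1 h2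
        show pvGetS (pvMarks s (pvPush mask H W s (cx, cy))) d.2 d.1 = _
        rw [h, List.contains_eq_mem]
      have hq'seen : ∀ c ∈ rest ++ pvPush mask H W s (cx, cy),
          0 ≤ c.1 ∧ 0 ≤ c.2 ∧ pvGetS (pvNext mask H W s (cx, cy)) c.2 c.1 = true := by
        intro c hcm
        rcases List.mem_append.1 hcm with h | h
        · obtain ⟨h1, h2, h3⟩ := hrest c h
          exact ⟨h1, h2, by rw [hs' c h1 h2, h3]; simp⟩
        · obtain ⟨h1, h2⟩ := hPnn c h
          exact ⟨h1, h2, by rw [hs' c h1 h2]; simp [h]⟩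
      have hq'nd : (rest ++ pvPush mask H W s (cx, cy)).Nodup := by
        rw [List.nodup_append]
        refine ⟨hrestnd, hPnd, ?_⟩
        intro c hcr c' hcP heq
        subst heq
        have h1 := (hrest c hcr).2.2
        have h2 := ((mem_pvPush mask H W s (cx, cy) c).1 hcP).2.1
        rw [h1] at h2
        simp at h2
      have hmlt : pvUnseen (pvNext mask H W s (cx, cy))
          + (rest ++ pvPush mask H W s (cx, cy)).length < n := by
        simp only [List.length_cons] at hm
        simp only [List.length_append]
        omega
      obtain ⟨R0, R1, R2, R3, R4, R5, R6⟩ := ih _ hmlt (pvNext mask H W s (cx, cy))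
        (rest ++ pvPush mask H W s (cx, cy)) rfl hq'seen hq'nd
      have hPact : ∀ d ∈ pvPush mask H W s (cx, cy), pvAct mask H W d := by
        intro d hd
        obtain ⟨hnb, hun, hmk⟩ := (mem_pvPush mask H W s (cx, cy) d).1 hd
        rw [mem_pvNbrsA] at hnb
        exact ⟨⟨by omega, by omega, by omega, by omega⟩, hmk⟩
      refine ⟨?_, ?_, ?_, ?_, ?_, ?_, ?_⟩
      · intro d hd
        rcases List.mem_cons.1 hd with h | h
        · subst h; exact ⟨hc0.1, hc0.2.1⟩
        · exact R0 d h
      · intro d hd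
        rcases List.mem_cons.1 hd with h | h
        · subst h; exact Or.inl List.mem_cons_self
        · rcases R1 d h with h2 | h2
          · rcases List.mem_append.1 h2 with h3 | h3
            · exact Or.inl (List.mem_cons_of_mem _ h3)
            · exact Or.inr ((mem_pvPush mask H W s (cx, cy) d).1 h3).2.1
          · obtain ⟨hd1, hd2⟩ := R0 d h
            rw [hs' d hd1 hd2] at h2
            rcases Bool.or_eq_false_iff.1 h2 with ⟨h3, _⟩
            exact Or.inr h3
      · intro c hcm
        rcases List.mem_cons.1 hcm with h | h
        · subst h; exact List.mem_cons_self
        · exact List.mem_cons_of_mem _ (R2 c (List.mem_append.2 (Or.inl h)))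
      · intro c h1 h2
        rw [R3 c h1 h2, hs' c h1 h2]
        by_cases hin : c ∈ (pvRun mask H W (pvNext mask H W s (cx, cy))
            (rest ++ pvPush mask H W s (cx, cy))).1
        · simp [hin, List.mem_cons_of_mem]
        · have hnp : c ∉ pvPush mask H W s (cx, cy) := fun hc =>
            hin (R2 c (List.mem_append.2 (Or.inr hc)))
        
          by_cases hce : c = (cx, cy)
          · subst hce
            rw [hc0.2.2]
            simp [hin, hnp]
          · have : (c ∈ (cx, cy) :: (pvRun mask H W (pvNext mask H W s (cx, cy))
                (rest ++ pvPush mask H W s (cx, cy))).1) = False := by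
              simp [hce, hin]
            simp [hce, hin, hnp]
      · rw [List.nodup_cons]
        refine ⟨fun hmem => ?_, R4⟩
        rcases R1 (cx, cy) hmem with h | h
        · rcases List.mem_append.1 h with h2 | h2
          · exact hcnotr h2
          · have h3 := ((mem_pvPush mask H W s (cx, cy) (cx, cy)).1 h2).2.1
            rw [hc0.2.2] at h3
            simp at h3
        · rw [hs' (cx, cy) hc0.1 hc0.2.1, hc0.2.2] at h
          simp at h
      · intro hact d hd
        rcases List.mem_cons.1 hd with h | h
        · subst h
          exact ⟨(cx, cy), List.mem_cons_self, Relation.ReflTransGen.refl⟩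
        · have hact' : ∀ c ∈ rest ++ pvPush mask H W s (cx, cy), pvAct mask H W c := by
            intro c hcm
            rcases List.mem_append.1 hcm with h2 | h2
            · exact hact c (List.mem_cons_of_mem _ h2)
            · exact hPact c h2
          obtain ⟨c', hc'm, hc'conn⟩ := R5 hact' d h
          rcases List.mem_append.1 hc'm with h2 | h2
          · exact ⟨c', List.mem_cons_of_mem _ h2, hc'conn⟩
          · refine ⟨(cx, cy), List.mem_cons_self, Relation.ReflTransGen.head ?_ hc'conn⟩
            obtain ⟨hnb, _, _⟩ := (mem_pvPush mask H W s (cx, cy) c').1 h2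
            rw [mem_pvNbrsA] at hnb
            exact ⟨hact (cx, cy) List.mem_cons_self, hPact c' h2, by omega⟩
      · intro c hcm d hadj
        rcases List.mem_cons.1 hcm with h | h
        · subst h
          obtain ⟨hactc, hactd, hb⟩ := hadj
          have hd1 : 0 ≤ d.1 := hactd.1.1
          have hd2 : 0 ≤ d.2 := hactd.1.2.2.1
          rw [R3 d hd1 hd2, hs' d hd1 hd2]
          by_cases hsd : pvGetS s d.2 d.1 = true
          · rw [hsd]; simp
          · have hdP : d ∈ pvPush mask H W s (cx, cy) := by
              rw [mem_pvPush, mem_pvNbrsA]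
              refine ⟨?_, by simpa using hsd, hactd.2⟩
              obtain ⟨⟨_, _, _, _⟩, _⟩ := hactd
              constructor <;> constructor <;> omega
            simp [hdP]
        · exact R6 c h d hadj

theorem pvFlood (mask : List (List Int)) (H W : Int) (s0 : List (List Bool)) (e : Int × Int)
    (hact : pvAct mask H W e)
    (hunseen : ∀ d, pvConn mask H W e d → pvGetS s0 d.2 d.1 = false) :
    (pvRun mask H W (pvSetS s0 e.2 e.1) [e]).1.Nodup ∧
    (∀ d, d ∈ (pvRun mask H W (pvSetS s0 e.2 e.1) [e]).1 ↔ pvConn mask H W e d) ∧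
    (∀ c : Int × Int, 0 ≤ c.1 → 0 ≤ c.2 →
      (pvGetS (pvRun mask H W (pvSetS s0 e.2 e.1) [e]).2 c.2 c.1 = true
        ↔ (pvGetS s0 c.2 c.1 = true ∨ pvConn mask H W e c))) := by
  have he1 : 0 ≤ e.1 := hact.1.1
  have he2 : 0 ≤ e.2 := hact.1.2.2.1
  have hseed : pvGetS (pvSetS s0 e.2 e.1) e.2 e.1 = true := pvGetS_set_self s0 e.2 e.1
  have hsets : ∀ d : Int × Int, 0 ≤ d.1 → 0 ≤ d.2 → d ≠ e →
      pvGetS (pvSetS s0 e.2 e.1) d.2 d.1 = pvGetS s0 d.2 d.1 := by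
    intro d h1 h2 hne
    refine pvGetS_set_ne s0 e.2 e.1 d.2 d.1 ?_
    rintro ⟨hy, hx⟩
    exact hne (Prod.ext (by omega) (by omega))
  obtain ⟨M0, M1, M2, M3, M4, M5, M6⟩ := pvRunMega mask H W
    (pvUnseen (pvSetS s0 e.2 e.1) + 1) (pvSetS s0 e.2 e.1) [e] (by simp)
    (by
      intro c hc
      rw [List.mem_singleton] at hc
      subst hc
      exact ⟨he1, he2, hseed⟩)
    (by simp)
  have hsub : ∀ d ∈ (pvRun mask H W (pvSetS s0 e.2 e.1) [e]).1, pvConn mask H W e d := by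
    intro d hd
    obtain ⟨c, hcm, hconn⟩ := M5 (by
      intro c hc
      rw [List.mem_singleton] at hc
      subst hc
      exact hact) d hd
    rw [List.mem_singleton] at hcm
    subst hcm
    exact hconn
  have hsup : ∀ d, pvConn mask H W e d → d ∈ (pvRun mask H W (pvSetS s0 e.2 e.1) [e]).1 := by
    intro d hconn
    induction hconn with
    | refl => exact M2 _ (by simp)
    | @tail b d' hbc hadj ih =>
      have hseen := M6 b ih d' hadj
      have hd1 : 0 ≤ d'.1 := hadj.2.1.1.1
      have hd2 : 0 ≤ d'.2 := hadj.2.1.1.2.2.1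
      rw [M3 d' hd1 hd2] at hseen
      by_cases hde : d' = e
      · subst hde
        exact M2 _ (by simp)
      · rw [hsets d' hd1 hd2 hde,
          hunseen d' (Relation.ReflTransGen.tail hbc hadj)] at hseen
        simpa using hseen
  refine ⟨M4, fun d => ⟨hsub d, hsup d⟩, ?_⟩
  intro c h1 h2
  rw [M3 c h1 h2]
  by_cases hce : c = e
  · subst hce
    rw [hseed]
    exact ⟨fun _ => Or.inr Relation.ReflTransGen.refl, fun _ => by simp⟩
  · rw [hsets c h1 h2 hce]
    have hiff : c ∈ (pvRun mask H W (pvSetS s0 e.2 e.1) [e]).1 ↔ pvConn mask H W e c :=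
      ⟨hsub c, hsup c⟩
    simp [hiff]


-- ---------- linear indices and the row-major cell list ----------
def pvIdx (W : Int) (c : Int × Int) : Int := c.2 * W + c.1

lemma pvIdx_div_mod (W x y : Int) (h0 : 0 ≤ x) (hW : x < W) :
    (y * W + x) / W = y ∧ (y * W + x) % W = x := by
  have hW0 : 0 < W := lt_of_le_of_lt h0 hW
  constructor
  · rw [add_comm, Int.add_mul_ediv_right _ _ (ne_of_gt hW0), Int.ediv_eq_zero_of_lt h0 hW]
    ring
  · rw [add_comm, Int.add_mul_emod_self_right, Int.emod_eq_of_lt h0 hW]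

lemma pvIdx_inj (H W : Int) (a b : Int × Int) (ha : pvInGrid H W a) (hb : pvInGrid H W b)
    (h : pvIdx W a = pvIdx W b) : a = b := by
  obtain ⟨ha1, ha2, ha3, ha4⟩ := ha
  obtain ⟨hb1, hb2, hb3, hb4⟩ := hb
  have h1 := pvIdx_div_mod W a.1 a.2 ha1 ha2
  have h2 := pvIdx_div_mod W b.1 b.2 hb1 hb2
  unfold pvIdx at h
  rw [h] at h1
  refine Prod.ext ?_ ?_
  · rw [← h1.2]; exact h2.2
  · rw [← h1.1]; exact h2.1

lemma pvIdx_nonneg (H W : Int) (c : Int × Int) (hc : pvInGrid H W c) : 0 ≤ pvIdx W c := by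
  obtain ⟨h1, h2, h3, h4⟩ := hc
  have : 0 ≤ c.2 * W := mul_nonneg h3 (by omega)
  unfold pvIdx
  omega

lemma pvIdx_lt (H W : Int) (a b : Int × Int) (ha : pvInGrid H W a) (hb : pvInGrid H W b)
    (h : a.2 < b.2 ∨ (a.2 = b.2 ∧ a.1 < b.1)) : pvIdx W a < pvIdx W b := by
  obtain ⟨ha1, ha2, ha3, ha4⟩ := ha
  obtain ⟨hb1, hb2, hb3, hb4⟩ := hb
  unfold pvIdx
  rcases h with h | ⟨h1, h2⟩
  · have hmul : (a.2 + 1) * W ≤ b.2 * W := by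
      refine mul_le_mul_of_nonneg_right (by omega) (by omega)
    rw [add_mul, one_mul] at hmul
    omega
  · rw [h1]
    omega

def pvCells (H W : Int) : List (Int × Int) :=
  (PySem.List.pyRange 0 H 1).flatMap (fun y => (PySem.List.pyRange 0 W 1).map (fun x => (x, y)))

lemma mem_pvCells (H W : Int) (c : Int × Int) : c ∈ pvCells H W ↔ pvInGrid H W c := by
  cases c with
  | mk a b =>
    simp only [pvCells, List.mem_flatMap, List.mem_map, PySem.List.mem_pyRange_one,
      Prod.mk.injEq, pvInGrid]
    constructor
    · rintro ⟨y, hy, x, hx, rfl, rfl⟩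
      exact ⟨hx.1, hx.2, hy.1, hy.2⟩
    · rintro ⟨h1, h2, h3, h4⟩
      exact ⟨b, ⟨h3, h4⟩, a, ⟨h1, h2⟩, rfl, rfl⟩

lemma pvCells_pairwise (H W : Int) :
    (pvCells H W).Pairwise (fun a b => pvIdx W a < pvIdx W b) := by
  rw [pvCells, List.pairwise_flatMap]
  constructor
  · intro y hy
    rw [List.pairwise_map]
    refine List.Pairwise.imp_of_mem ?_ (PySem.List.pairwise_lt_pyRange_one _ _)
    intro a b ha hb hab
    rw [PySem.List.mem_pyRange_one] at hy ha hb
    exact pvIdx_lt H W (a, y) (b, y) ⟨ha.1, ha.2, hy.1, hy.2⟩ ⟨hb.1, hb.2, hy.1, hy.2⟩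
      (Or.inr ⟨rfl, hab⟩)
  · refine List.Pairwise.imp_of_mem ?_ (PySem.List.pairwise_lt_pyRange_one _ _)
    intro y1 y2 hy1 hy2 h12
    intro c1 hc1 c2 hc2
    simp only [List.mem_map] at hc1 hc2
    obtain ⟨x1, hx1, rfl⟩ := hc1
    obtain ⟨x2, hx2, rfl⟩ := hc2
    rw [PySem.List.mem_pyRange_one] at hy1 hy2 hx1 hx2
    exact pvIdx_lt H W (x1, y1) (x2, y2) ⟨hx1.1, hx1.2, hy1.1, hy1.2⟩
      ⟨hx2.1, hx2.2, hy2.1, hy2.2⟩ (Or.inl h12)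

lemma pvCells_nodup (H W : Int) : (pvCells H W).Nodup :=
  (pvCells_pairwise H W).imp (fun h => by intro he; subst he; omega)

-- the earlier-prefix characterisation: what lies before a cell in the row-major scan
lemma pvCells_split (H W : Int) (P rest : List (Int × Int)) (e : Int × Int)
    (hsplit : pvCells H W = P ++ e :: rest) (d : Int × Int) :
    d ∈ P ↔ pvInGrid H W d ∧ pvIdx W d < pvIdx W e := by
  have hpw := pvCells_pairwise H W
  rw [hsplit] at hpw
  rw [List.pairwise_append] at hpw
  obtain ⟨hp1, hp2, hp3⟩ := hpw
  constructor
  · intro hd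
    refine ⟨(mem_pvCells H W d).1 (by rw [hsplit]; exact List.mem_append.2 (Or.inl hd)), ?_⟩
    exact hp3 d hd e List.mem_cons_self
  · rintro ⟨hgrid, hlt⟩
    have hdmem : d ∈ P ++ e :: rest := by rw [← hsplit]; exact (mem_pvCells H W d).2 hgrid
    rcases List.mem_append.1 hdmem with h | h
    · exact h
    · rcases List.mem_cons.1 h with h2 | h2
      · subst h2; omega
      · have := (List.pairwise_cons.1 hp2).1 d h2
        omega

-- fold over the two ranges = fold over the row-major cell list
lemma pvFoldl_cells {σ : Type} (H W : Int) (F : σ → Int → Int → σ) (init : σ) :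
    (PySem.List.pyRange 0 H 1).foldl (fun st y =>
      (PySem.List.pyRange 0 W 1).foldl (fun st2 x => F st2 x y) st) init
    = (pvCells H W).foldl (fun st c => F st c.1 c.2) init := by
  rw [pvCells, pvFoldl_flatMap]
  simp only [List.foldl_map]

-- ---------- union-find: basic find lemmas ----------
lemma ufFind_eq (d : PySem.Dict Int Int) (i : Int) :
    ufFind d i = if 0 ≤ PySem.Dict.getD d i i ∧ PySem.Dict.getD d i i < i
      then ufFind d (PySem.Dict.getD d i i) else i := by
  rw [ufFind]
  split <;> rfl

lemma ufFind_not_contains (d : PySem.Dict Int Int) (i : Int)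
    (h : PySem.Dict.get? d i = none) : ufFind d i = i := by
  rw [ufFind_eq, PySem.Dict.getD_eq_get?_getD, h]
  simp

lemma ufFind_root (d : PySem.Dict Int Int)
    (hB : ∀ k p : Int, PySem.Dict.get? d k = some p → 0 ≤ p ∧ p ≤ k ∧ d.contains p = true) :
    ∀ (n : Nat) (i : Int), i.toNat = n → d.contains i = true →
      d.contains (ufFind d i) = true ∧ PySem.Dict.get? d (ufFind d i) = some (ufFind d i) := by
  intro n
  induction n using Nat.strong_induction_on with
  | _ n ih =>
    intro i hn hc
    cases hp : PySem.Dict.get? d i with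
    | none =>
      rw [PySem.Dict.get?_eq_none_iff_contains] at hp
      rw [hp] at hc
      cases hc
    | some p =>
    obtain ⟨hp1, hp2, hp3⟩ := hB i p hp
    rw [ufFind_eq, PySem.Dict.getD_eq_get?_getD, hp]
    simp only [Option.getD_some]
    by_cases hg : 0 ≤ p ∧ p < i
    · rw [if_pos hg]
      exact ih p.toNat (by omega) p rfl hp3
    · rw [if_neg hg]
      have : p = i := by omega
      subst this
      exact ⟨hc, hp⟩

lemma ufFind_insert_fresh (d : PySem.Dict Int Int)
    (hB : ∀ k p : Int, PySem.Dict.get? d k = some p → 0 ≤ p ∧ p ≤ k ∧ d.contains p = true)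
    (k : Int) (hk : d.contains k = false) :
    ∀ (n : Nat) (j : Int), j.toNat = n → ufFind (d.insert k k) j = ufFind d j := by
  intro n
  induction n using Nat.strong_induction_on with
  | _ n ih =>
    intro j hn
    by_cases hjk : j = k
    · subst hjk
      have hg : PySem.Dict.get? d j = none := by
        rw [PySem.Dict.get?_eq_none_iff_contains]; exact hk
      rw [ufFind_not_contains d j hg, ufFind_eq, PySem.Dict.getD_eq_get?_getD,
        PySem.Dict.get?_insert_self]
      simp
    · have hgd : PySem.Dict.getD (d.insert k k) j j = PySem.Dict.getD d j j := by
        rw [PySem.Dict.getD_insert]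
        simp [hjk]
      rw [ufFind_eq, hgd, ufFind_eq d j]
      cases hget : PySem.Dict.get? d j with
      | none =>
        rw [PySem.Dict.getD_eq_get?_getD, hget]
        simp
      | some p =>
        obtain ⟨hp1, hp2, hp3⟩ := hB j p hget
        rw [PySem.Dict.getD_eq_get?_getD, hget]
        simp only [Option.getD_some]
        by_cases hg : 0 ≤ p ∧ p < j
        · rw [if_pos hg, if_pos hg]
          exact ih p.toNat (by omega) p rfl
        · rw [if_neg hg, if_neg hg]

lemma ufFind_union (d : PySem.Dict Int Int)
    (hB : ∀ k p : Int, PySem.Dict.get? d k = some p → 0 ≤ p ∧ p ≤ k ∧ d.contains p = true)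
    (hnn : ∀ k : Int, d.contains k = true → 0 ≤ k)
    (ra rb : Int) (hra : PySem.Dict.get? d ra = some ra) (hrb : PySem.Dict.get? d rb = some rb)
    (hlt : ra < rb) :
    ∀ (n : Nat) (j : Int), j.toNat = n →
      ufFind (d.insert rb ra) j = if ufFind d j = rb then ra else ufFind d j := by
  intro n
  induction n using Nat.strong_induction_on with
  | _ n ih =>
    intro j hn
    have hrann : 0 ≤ ra := (hB ra ra hra).1
    by_cases hjrb : j = rb
    · rw [hjrb]
      have hfj : ufFind d rb = rb := by
        rw [ufFind_eq, PySem.Dict.getD_eq_get?_getD, hrb]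
        simp
      rw [hfj, if_pos rfl]
      rw [ufFind_eq, PySem.Dict.getD_eq_get?_getD, PySem.Dict.get?_insert_self]
      simp only [Option.getD_some]
      rw [if_pos ⟨hrann, hlt⟩]
      rw [ufFind_eq, PySem.Dict.getD_eq_get?_getD, PySem.Dict.get?_insert,
        if_neg (show ra ≠ rb by omega), hra]
      simp
    · have hgd : PySem.Dict.getD (d.insert rb ra) j j = PySem.Dict.getD d j j := by
        rw [PySem.Dict.getD_insert]
        simp [hjrb]
      cases hget : PySem.Dict.get? d j with
      | none =>
        have hfj : ufFind d j = j := ufFind_not_contains d j hget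
        rw [hfj, if_neg hjrb, ufFind_eq, hgd, PySem.Dict.getD_eq_get?_getD, hget]
        simp
      | some p =>
        obtain ⟨hp1, hp2, hp3⟩ := hB j p hget
        by_cases hg : 0 ≤ p ∧ p < j
        · rw [ufFind_eq, hgd, PySem.Dict.getD_eq_get?_getD, hget]
          simp only [Option.getD_some]
          rw [if_pos hg, ih p.toNat (by omega) p rfl]
          rw [ufFind_eq d j, PySem.Dict.getD_eq_get?_getD, hget]
          simp only [Option.getD_some]
          rw [if_pos hg]
        · have hfj : ufFind d j = j := by
            rw [ufFind_eq, PySem.Dict.getD_eq_get?_getD, hget]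
            simp only [Option.getD_some]
            rw [if_neg hg]
          rw [hfj, if_neg hjrb, ufFind_eq, hgd, PySem.Dict.getD_eq_get?_getD, hget]
          simp only [Option.getD_some]
          rw [if_neg hg]

-- ---------- pass 1: the union-find invariant ----------
-- the step of B's first pass, one cell at a time (c = (x, y))
def ufStep1 (mask : List (List Int)) (W : Int) (d : PySem.Dict Int Int) (c : Int × Int) :
    PySem.Dict Int Int :=
  if pvGetM mask c.2 c.1 == 0 then d
  else
    [(c.2 - 1, c.1 - 1), (c.2 - 1, c.1), (c.2 - 1, c.1 + 1), (c.2, c.1 - 1)].foldl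
      (fun d3 (nb : Int × Int) =>
        if 0 ≤ nb.1 && (0 ≤ nb.2 && nb.2 < W) && !(pvGetM mask nb.1 nb.2 == 0) then
          let ra := ufFind d3 (c.2 * W + c.1)
          let rb := ufFind d3 (nb.1 * W + nb.2)
          if ra < rb then PySem.Dict.insert d3 rb ra
          else if rb < ra then PySem.Dict.insert d3 ra rb
          else d3
        else d3)
      (PySem.Dict.insert d (c.2 * W + c.1) (c.2 * W + c.1))

def ufCore (mask : List (List Int)) (H W : Int) (P : List (Int × Int))
    (d : PySem.Dict Int Int) : Prop :=
  d.keys.Nodup ∧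
  (∀ k : Int, d.contains k = true ↔ ∃ c ∈ P, pvAct mask H W c ∧ k = pvIdx W c) ∧
  (∀ k p : Int, PySem.Dict.get? d k = some p → 0 ≤ p ∧ p ≤ k ∧ d.contains p = true) ∧
  (∀ a : Int × Int, pvAct mask H W a → ∀ p : Int, PySem.Dict.get? d (pvIdx W a) = some p →
     ∃ b : Int × Int, pvAct mask H W b ∧ p = pvIdx W b ∧ pvConn mask H W a b)

def ufInv (mask : List (List Int)) (H W : Int) (P : List (Int × Int))
    (d : PySem.Dict Int Int) : Prop :=
  ufCore mask H W P d ∧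
  (∀ a b : Int × Int, a ∈ P → b ∈ P → pvAdj mask H W a b →
     ufFind d (pvIdx W a) = ufFind d (pvIdx W b))

lemma ufKeys_nonneg (mask : List (List Int)) (H W : Int) (P : List (Int × Int))
    (d : PySem.Dict Int Int) (hK : ∀ k : Int, d.contains k = true ↔
      ∃ c ∈ P, pvAct mask H W c ∧ k = pvIdx W c) :
    ∀ k : Int, d.contains k = true → 0 ≤ k := by
  intro k hk
  obtain ⟨c, _, hact, rfl⟩ := (hK k).1 hk
  exact pvIdx_nonneg H W c hact.1

-- following parent pointers stays inside the component
lemma ufFind_connOf (mask : List (List Int)) (H W : Int) (d : PySem.Dict Int Int)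
    (hB : ∀ k p : Int, PySem.Dict.get? d k = some p → 0 ≤ p ∧ p ≤ k ∧ d.contains p = true)
    (hC1 : ∀ a : Int × Int, pvAct mask H W a → ∀ p : Int,
      PySem.Dict.get? d (pvIdx W a) = some p →
      ∃ b : Int × Int, pvAct mask H W b ∧ p = pvIdx W b ∧ pvConn mask H W a b) :
    ∀ (n : Nat) (a : Int × Int), pvAct mask H W a → (pvIdx W a).toNat = n →
      ∃ b : Int × Int, pvAct mask H W b ∧ ufFind d (pvIdx W a) = pvIdx W b ∧
        pvConn mask H W a b := by
  intro n
  induction n using Nat.strong_induction_on with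
  | _ n ih =>
    intro a hact hn
    cases hget : PySem.Dict.get? d (pvIdx W a) with
    | none =>
      exact ⟨a, hact, ufFind_not_contains d _ hget, Relation.ReflTransGen.refl⟩
    | some p =>
      obtain ⟨hp1, hp2, hp3⟩ := hB _ p hget
      by_cases hg : 0 ≤ p ∧ p < pvIdx W a
      · obtain ⟨b1, hb1act, rfl, hconn1⟩ := hC1 a hact p hget
        obtain ⟨b2, hb2act, hfind2, hconn2⟩ := ih (pvIdx W b1).toNat (by omega) b1 hb1act rfl
        refine ⟨b2, hb2act, ?_, Relation.ReflTransGen.trans hconn1 hconn2⟩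
        rw [ufFind_eq, PySem.Dict.getD_eq_get?_getD, hget]
        simp only [Option.getD_some]
        rw [if_pos hg]
        exact hfind2
      · refine ⟨a, hact, ?_, Relation.ReflTransGen.refl⟩
        rw [ufFind_eq, PySem.Dict.getD_eq_get?_getD, hget]
        simp only [Option.getD_some]
        rw [if_neg hg]

-- which neighbour offsets pass 1 visits
def pvNbOf (e : Int × Int) (nb : Int × Int) : Prop :=
  (nb.1 = e.2 - 1 ∧ e.1 - 1 ≤ nb.2 ∧ nb.2 ≤ e.1 + 1) ∨ (nb.1 = e.2 ∧ nb.2 = e.1 - 1)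

-- one union with a qualifying earlier neighbour, and the whole inner fold
def ufUStep (mask : List (List Int)) (W : Int) (e : Int × Int)
    (d3 : PySem.Dict Int Int) (nb : Int × Int) : PySem.Dict Int Int :=
  if 0 ≤ nb.1 && (0 ≤ nb.2 && nb.2 < W) && !(pvGetM mask nb.1 nb.2 == 0) then
    let ra := ufFind d3 (e.2 * W + e.1)
    let rb := ufFind d3 (nb.1 * W + nb.2)
    if ra < rb then PySem.Dict.insert d3 rb ra
    else if rb < ra then PySem.Dict.insert d3 ra rb
    else d3
  else d3

lemma ufUStep_props (mask : List (List Int)) (H W : Int) (P rest : List (Int × Int))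
    (e : Int × Int) (hW : 0 < W) (hsplit : pvCells H W = P ++ e :: rest)
    (hacte : pvAct mask H W e) (nb : Int × Int) (hNb : pvNbOf e nb)
    (d : PySem.Dict Int Int) (hcore : ufCore mask H W (P ++ [e]) d) :
    ufCore mask H W (P ++ [e]) (ufUStep mask W e d nb) ∧
    (∀ i j : Int, ufFind d i = ufFind d j →
      ufFind (ufUStep mask W e d nb) i = ufFind (ufUStep mask W e d nb) j) ∧
    ((0 ≤ nb.1 && (0 ≤ nb.2 && nb.2 < W) && !(pvGetM mask nb.1 nb.2 == 0)) = true →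
      ufFind (ufUStep mask W e d nb) (e.2 * W + e.1)
        = ufFind (ufUStep mask W e d nb) (nb.1 * W + nb.2)) := by
  obtain ⟨hN, hK, hB, hC1⟩ := hcore
  by_cases hq : (0 ≤ nb.1 && (0 ≤ nb.2 && nb.2 < W) && !(pvGetM mask nb.1 nb.2 == 0)) = true
  case neg =>
    rw [ufUStep, if_neg hq]
    exact ⟨⟨hN, hK, hB, hC1⟩, fun i j h => h, fun h => absurd h hq⟩
  case pos =>
    simp only [Bool.and_eq_true, Bool.not_eq_true', beq_eq_false_iff_ne, decide_eq_true_eq]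
      at hq
    obtain ⟨⟨hq1, hq2, hq3⟩, hq4⟩ := hq
    have hactb : pvAct mask H W (nb.2, nb.1) := by
      refine ⟨⟨hq2, hq3, hq1, ?_⟩, hq4⟩
      have := hacte.1.2.2.2
      rcases hNb with ⟨h1, _⟩ | ⟨h1, _⟩ <;> omega
    have hltb : pvIdx W (nb.2, nb.1) < pvIdx W e := by
      refine pvIdx_lt H W _ e hactb.1 hacte.1 ?_
      rcases hNb with ⟨h1, h2, h3⟩ | ⟨h1, h2⟩
      · exact Or.inl (show nb.1 < e.2 by omega)
      · exact Or.inr ⟨h1, show nb.2 < e.1 by omega⟩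
    have hbP : (nb.2, nb.1) ∈ P := (pvCells_split H W P rest e hsplit _).2 ⟨hactb.1, hltb⟩
    have hconK : d.contains (e.2 * W + e.1) = true :=
      (hK _).2 ⟨e, List.mem_append.2 (Or.inr (by simp)), hacte, rfl⟩
    have hconM : d.contains (nb.1 * W + nb.2) = true :=
      (hK _).2 ⟨(nb.2, nb.1), List.mem_append.2 (Or.inl hbP), hactb, rfl⟩
    have hnnk := ufKeys_nonneg mask H W (P ++ [e]) d hK
    obtain ⟨hraC, hraR⟩ := ufFind_root d hB (e.2 * W + e.1).toNat _ rfl hconK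
    obtain ⟨hrbC, hrbR⟩ := ufFind_root d hB (nb.1 * W + nb.2).toNat _ rfl hconM
    obtain ⟨be, hbeAct, hbeEq, hbeConn⟩ :=
      ufFind_connOf mask H W d hB hC1 (pvIdx W e).toNat e hacte rfl
    obtain ⟨bb, hbbAct, hbbEq, hbbConn⟩ :=
      ufFind_connOf mask H W d hB hC1 (pvIdx W (nb.2, nb.1)).toNat (nb.2, nb.1) hactb rfl
    have hkeq : pvIdx W e = e.2 * W + e.1 := rfl
    have hmeq : pvIdx W (nb.2, nb.1) = nb.1 * W + nb.2 := rfl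
    rw [hkeq] at hbeEq
    rw [hmeq] at hbbEq
    have hadj : pvAdj mask H W e (nb.2, nb.1) := by
      refine ⟨hacte, hactb, ?_, ?_, ?_, ?_⟩
      · show nb.2 ≤ e.1 + 1
        rcases hNb with ⟨h1, h2, h3⟩ | ⟨h1, h2⟩ <;> omega
      · show e.1 - 1 ≤ nb.2
        rcases hNb with ⟨h1, h2, h3⟩ | ⟨h1, h2⟩ <;> omega
      · show nb.1 ≤ e.2 + 1
        rcases hNb with ⟨h1, h2, h3⟩ | ⟨h1, h2⟩ <;> omega
      · show e.2 - 1 ≤ nb.1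
        rcases hNb with ⟨h1, h2, h3⟩ | ⟨h1, h2⟩ <;> omega
    have hqb : (0 ≤ nb.1 && (0 ≤ nb.2 && nb.2 < W) && !(pvGetM mask nb.1 nb.2 == 0)) = true := by
      simp only [Bool.and_eq_true, Bool.not_eq_true', beq_eq_false_iff_ne, decide_eq_true_eq]
      exact ⟨⟨hq1, hq2, hq3⟩, hq4⟩
    rw [ufUStep, if_pos hqb]
    simp only []
    by_cases hlt1 : ufFind d (e.2 * W + e.1) < ufFind d (nb.1 * W + nb.2)
    · rw [if_pos hlt1]
      have hUchar : ∀ j : Int,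
          ufFind (d.insert (ufFind d (nb.1 * W + nb.2)) (ufFind d (e.2 * W + e.1))) j
            = if ufFind d j = ufFind d (nb.1 * W + nb.2) then ufFind d (e.2 * W + e.1)
              else ufFind d j :=
        fun j => ufFind_union d hB hnnk _ _ hraR hrbR hlt1 j.toNat j rfl
      have hcont : ∀ x : Int,
          (d.insert (ufFind d (nb.1 * W + nb.2)) (ufFind d (e.2 * W + e.1))).contains x
            = d.contains x := by
        intro x
        rw [PySem.Dict.contains_insert]
        by_cases hx : x = ufFind d (nb.1 * W + nb.2)
        · simp [hx, hrbC]
        · simp [hx]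
      refine ⟨⟨?_, ?_, ?_, ?_⟩, ?_, ?_⟩
      · rw [PySem.Dict.keys_insert_of_contains _ _ hrbC]
        exact hN
      · intro k
        rw [hcont]
        exact hK k
      · intro k p hget
        rw [PySem.Dict.get?_insert] at hget
        by_cases hx : k = ufFind d (nb.1 * W + nb.2)
        · rw [if_pos hx] at hget
          cases hget
          refine ⟨hnnk _ hraC, by omega, by rw [hcont]; exact hraC⟩
        · rw [if_neg hx] at hget
          obtain ⟨h1, h2, h3⟩ := hB k p hget
          exact ⟨h1, h2, by rw [hcont]; exact h3⟩
      · intro a hacta p hget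
        rw [PySem.Dict.get?_insert] at hget
        by_cases hx : pvIdx W a = ufFind d (nb.1 * W + nb.2)
        · rw [if_pos hx] at hget
          cases hget
          have haeq : a = bb := pvIdx_inj H W a bb hacta.1 hbbAct.1 (by rw [hx, hbbEq])
          subst haeq
          exact ⟨be, hbeAct, hbeEq,
            Relation.ReflTransGen.trans (pvConn_symm mask H W _ _ hbbConn)
              (Relation.ReflTransGen.trans
                (Relation.ReflTransGen.single (pvAdj_symm mask H W _ _ hadj)) hbeConn)⟩
        · rw [if_neg hx] at hget
          exact hC1 a hacta p hget
      · intro i j h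
        rw [hUchar i, hUchar j, h]
      · intro _
        rw [hUchar, hUchar]
        rw [if_neg (by omega), if_pos rfl]
    · rw [if_neg hlt1]
      by_cases hlt2 : ufFind d (nb.1 * W + nb.2) < ufFind d (e.2 * W + e.1)
      · rw [if_pos hlt2]
        have hUchar : ∀ j : Int,
            ufFind (d.insert (ufFind d (e.2 * W + e.1)) (ufFind d (nb.1 * W + nb.2))) j
              = if ufFind d j = ufFind d (e.2 * W + e.1) then ufFind d (nb.1 * W + nb.2)
                else ufFind d j :=
          fun j => ufFind_union d hB hnnk _ _ hrbR hraR hlt2 j.toNat j rfl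
        have hcont : ∀ x : Int,
            (d.insert (ufFind d (e.2 * W + e.1)) (ufFind d (nb.1 * W + nb.2))).contains x
              = d.contains x := by
          intro x
          rw [PySem.Dict.contains_insert]
          by_cases hx : x = ufFind d (e.2 * W + e.1)
          · simp [hx, hraC]
          · simp [hx]
        refine ⟨⟨?_, ?_, ?_, ?_⟩, ?_, ?_⟩
        · rw [PySem.Dict.keys_insert_of_contains _ _ hraC]
          exact hN
        · intro k
          rw [hcont]
          exact hK k
        · intro k p hget
          rw [PySem.Dict.get?_insert] at hget
          by_cases hx : k = ufFind d (e.2 * W + e.1)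
          · rw [if_pos hx] at hget
            cases hget
            refine ⟨hnnk _ hrbC, by omega, by rw [hcont]; exact hrbC⟩
          · rw [if_neg hx] at hget
            obtain ⟨h1, h2, h3⟩ := hB k p hget
            exact ⟨h1, h2, by rw [hcont]; exact h3⟩
        · intro a hacta p hget
          rw [PySem.Dict.get?_insert] at hget
          by_cases hx : pvIdx W a = ufFind d (e.2 * W + e.1)
          · rw [if_pos hx] at hget
            cases hget
            have haeq : a = be := pvIdx_inj H W a be hacta.1 hbeAct.1 (by rw [hx, hbeEq])
            subst haeq
            exact ⟨bb, hbbAct, hbbEq,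
              Relation.ReflTransGen.trans (pvConn_symm mask H W _ _ hbeConn)
                (Relation.ReflTransGen.trans (Relation.ReflTransGen.single hadj) hbbConn)⟩
          · rw [if_neg hx] at hget
            exact hC1 a hacta p hget
        · intro i j h
          rw [hUchar i, hUchar j, h]
        · intro _
          rw [hUchar, hUchar]
          rw [if_pos rfl, if_neg (by omega)]
      · rw [if_neg hlt2]
        refine ⟨⟨hN, hK, hB, hC1⟩, fun i j h => h, fun _ => by omega⟩

lemma ufNbrFold (mask : List (List Int)) (H W : Int) (P rest : List (Int × Int))
    (e : Int × Int) (hW : 0 < W) (hsplit : pvCells H W = P ++ e :: rest)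
    (hacte : pvAct mask H W e) :
    ∀ (L : List (Int × Int)) (d : PySem.Dict Int Int),
    ufCore mask H W (P ++ [e]) d →
    (∀ nb ∈ L, pvNbOf e nb) →
    ufCore mask H W (P ++ [e]) (L.foldl (ufUStep mask W e) d) ∧
    (∀ i j : Int, ufFind d i = ufFind d j →
      ufFind (L.foldl (ufUStep mask W e) d) i = ufFind (L.foldl (ufUStep mask W e) d) j) ∧
    (∀ nb ∈ L, (0 ≤ nb.1 && (0 ≤ nb.2 && nb.2 < W) && !(pvGetM mask nb.1 nb.2 == 0)) = true →
      ufFind (L.foldl (ufUStep mask W e) d) (e.2 * W + e.1)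
        = ufFind (L.foldl (ufUStep mask W e) d) (nb.1 * W + nb.2)) := by
  intro L
  induction L with
  | nil =>
    intro d hcore _
    exact ⟨hcore, fun i j h => h, by simp⟩
  | cons nb L' ih =>
    intro d hcore hL
    obtain ⟨hc1, hc2, hc3⟩ := ufUStep_props mask H W P rest e hW hsplit hacte nb
      (hL nb (by simp)) d hcore
    obtain ⟨ih1, ih2, ih3⟩ := ih (ufUStep mask W e d nb) hc1
      (fun x hx => hL x (List.mem_cons_of_mem _ hx))
    rw [List.foldl_cons]
    refine ⟨ih1, fun i j h => ih2 i j (hc2 i j h), ?_⟩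
    intro nb' hnb' hq
    rcases List.mem_cons.1 hnb' with h | h
    · subst h
      exact ih2 _ _ (hc3 hq)
    · exact ih3 nb' h hq

lemma pvFoldl_prefix {α σ : Type} (L : List α) (f : σ → α → σ) (Inv : List α → σ → Prop)
    (step : ∀ P e rest s, L = P ++ e :: rest → Inv P s → Inv (P ++ [e]) (f s e)) :
    ∀ (P suffix : List α) (s : σ), L = P ++ suffix → Inv P s → Inv L (suffix.foldl f s) := by
  intro P suffix
  induction suffix generalizing P with
  | nil =>
    intro s h hi
    rw [List.foldl_nil, h, List.append_nil]
    exact hi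
  | cons e rest ih =>
    intro s h hi
    rw [List.foldl_cons]
    exact ih (P ++ [e]) (f s e) (by rw [h, List.append_assoc]; rfl) (step P e rest s h hi)

lemma ufStep1_inv (mask : List (List Int)) (H W : Int) (P rest : List (Int × Int))
    (e : Int × Int) (hW : 0 < W) (hsplit : pvCells H W = P ++ e :: rest)
    (d : PySem.Dict Int Int) (hinv : ufInv mask H W P d) :
    ufInv mask H W (P ++ [e]) (ufStep1 mask W d e) := by
  obtain ⟨⟨hN, hK, hB, hC1⟩, hC2⟩ := hinv
  have hegrid : pvInGrid H W e := (mem_pvCells H W e).1 (by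
    rw [hsplit]; exact List.mem_append.2 (Or.inr List.mem_cons_self))
  by_cases hm : (pvGetM mask e.2 e.1 == 0) = true
  · rw [ufStep1, if_pos hm]
    rw [beq_iff_eq] at hm
    have hnact : ¬ pvAct mask H W e := fun h => h.2 hm
    refine ⟨⟨hN, ?_, hB, hC1⟩, ?_⟩
    · intro k
      rw [hK k]
      constructor
      · rintro ⟨c, hc, h1, h2⟩
        exact ⟨c, List.mem_append.2 (Or.inl hc), h1, h2⟩
      · rintro ⟨c, hc, h1, h2⟩
        rcases List.mem_append.1 hc with h | h
        · exact ⟨c, h, h1, h2⟩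
        · rw [List.mem_singleton] at h
          subst h
          exact absurd h1 hnact
    · intro a b ha hb hadj
      rcases List.mem_append.1 ha with ha | ha
      · rcases List.mem_append.1 hb with hb | hb
        · exact hC2 a b ha hb hadj
        · rw [List.mem_singleton] at hb
          subst hb
          exact absurd hadj.2.1 hnact
      · rw [List.mem_singleton] at ha
        subst ha
        exact absurd hadj.1 hnact
  · rw [ufStep1, if_neg hm]
    rw [beq_iff_eq] at hm
    have hacte : pvAct mask H W e := ⟨hegrid, hm⟩
    have hkeq : pvIdx W e = e.2 * W + e.1 := rfl
    have hfresh : d.contains (e.2 * W + e.1) = false := by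
      cases hcc : d.contains (e.2 * W + e.1) with
      | false => rfl
      | true =>
        obtain ⟨c, hcP, hcact, hcidx⟩ := (hK _).1 hcc
        have hce : c = e := pvIdx_inj H W c e hcact.1 hegrid (by rw [← hcidx, hkeq])
        rw [hce] at hcP
        have := (pvCells_split H W P rest e hsplit e).1 hcP
        omega
    have hcore1 : ufCore mask H W (P ++ [e])
        (PySem.Dict.insert d (e.2 * W + e.1) (e.2 * W + e.1)) := by
      refine ⟨PySem.Dict.nodup_keys_insert _ _ _ hN, ?_, ?_, ?_⟩
      · intro k
        rw [PySem.Dict.contains_insert]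
        constructor
        · intro h
          rw [Bool.or_eq_true] at h
          rcases h with h | h
          · rw [beq_iff_eq] at h
            exact ⟨e, List.mem_append.2 (Or.inr (by simp)), hacte, by rw [h, hkeq]⟩
          · obtain ⟨c, hc, h1, h2⟩ := (hK k).1 h
            exact ⟨c, List.mem_append.2 (Or.inl hc), h1, h2⟩
        · rintro ⟨c, hc, h1, h2⟩
          rcases List.mem_append.1 hc with h | h
          · rw [Bool.or_eq_true]
            exact Or.inr ((hK k).2 ⟨c, h, h1, h2⟩)
          · rw [List.mem_singleton] at h
            subst h
            subst h2
            rw [Bool.or_eq_true]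
            exact Or.inl (by rw [hkeq]; exact beq_self_eq_true _)
      · intro k p hget
        rw [PySem.Dict.get?_insert] at hget
        by_cases hx : k = e.2 * W + e.1
        · rw [if_pos hx] at hget
          cases hget
          refine ⟨by rw [← hkeq]; exact pvIdx_nonneg H W e hegrid, by omega, ?_⟩
          rw [PySem.Dict.contains_insert]
          simp [hx]
        · rw [if_neg hx] at hget
          obtain ⟨h1, h2, h3⟩ := hB k p hget
          refine ⟨h1, h2, ?_⟩
          rw [PySem.Dict.contains_insert, h3]
          simp
      · intro a hacta p hget
        rw [PySem.Dict.get?_insert] at hget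
        by_cases hx : pvIdx W a = e.2 * W + e.1
        · rw [if_pos hx] at hget
          cases hget
          have hae : a = e := pvIdx_inj H W a e hacta.1 hegrid (by rw [hx, hkeq])
          subst hae
          exact ⟨a, hacta, hkeq.symm, Relation.ReflTransGen.refl⟩
        · rw [if_neg hx] at hget
          exact hC1 a hacta p hget
    have hpres1 : ∀ j : Int,
        ufFind (PySem.Dict.insert d (e.2 * W + e.1) (e.2 * W + e.1)) j = ufFind d j :=
      fun j => ufFind_insert_fresh d hB _ hfresh j.toNat j rfl
    have hL4 : ∀ nb ∈ [(e.2 - 1, e.1 - 1), (e.2 - 1, e.1), (e.2 - 1, e.1 + 1),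
        (e.2, e.1 - 1)], pvNbOf e nb := by
      intro nb hnb
      rcases List.mem_cons.1 hnb with rfl | hnb
      · exact Or.inl ⟨rfl, show e.1 - 1 ≤ e.1 - 1 by omega, show e.1 - 1 ≤ e.1 + 1 by omega⟩
      rcases List.mem_cons.1 hnb with rfl | hnb
      · exact Or.inl ⟨rfl, show e.1 - 1 ≤ e.1 by omega, show e.1 ≤ e.1 + 1 by omega⟩
      rcases List.mem_cons.1 hnb with rfl | hnb
      · exact Or.inl ⟨rfl, show e.1 - 1 ≤ e.1 + 1 by omega, show e.1 + 1 ≤ e.1 + 1 by omega⟩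
      rcases List.mem_cons.1 hnb with rfl | hnb
      · exact Or.inr ⟨rfl, rfl⟩
      · cases hnb
    obtain ⟨hcore', hpres2, hnbEq⟩ := ufNbrFold mask H W P rest e hW hsplit hacte
      [(e.2 - 1, e.1 - 1), (e.2 - 1, e.1), (e.2 - 1, e.1 + 1), (e.2, e.1 - 1)]
      (PySem.Dict.insert d (e.2 * W + e.1) (e.2 * W + e.1)) hcore1 hL4
    refine ⟨hcore', ?_⟩
    -- C2 for the extended prefix
    have hhalf : ∀ b ∈ P, pvAdj mask H W e b →
        ufFind ([(e.2 - 1, e.1 - 1), (e.2 - 1, e.1), (e.2 - 1, e.1 + 1),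
            (e.2, e.1 - 1)].foldl (ufUStep mask W e)
            (PySem.Dict.insert d (e.2 * W + e.1) (e.2 * W + e.1))) (pvIdx W e)
          = ufFind ([(e.2 - 1, e.1 - 1), (e.2 - 1, e.1), (e.2 - 1, e.1 + 1),
            (e.2, e.1 - 1)].foldl (ufUStep mask W e)
            (PySem.Dict.insert d (e.2 * W + e.1) (e.2 * W + e.1))) (pvIdx W b) := by
      intro b hbP hadj
      have hactb : pvAct mask H W b := hadj.2.1
      have hblt : pvIdx W b < pvIdx W e := ((pvCells_split H W P rest e hsplit b).1 hbP).2
      have hwin := hadj.2.2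
      have hb2 : ¬ e.2 < b.2 := by
        intro h
        have := pvIdx_lt H W e b hegrid hactb.1 (Or.inl h)
        omega
      have hb2' : b.2 = e.2 - 1 ∨ b.2 = e.2 := by omega
      have hmem : (b.2, b.1) ∈ [(e.2 - 1, e.1 - 1), (e.2 - 1, e.1), (e.2 - 1, e.1 + 1),
          (e.2, e.1 - 1)] := by
        rcases hb2' with h | h
        · have hb1 : b.1 = e.1 - 1 ∨ b.1 = e.1 ∨ b.1 = e.1 + 1 := by omega
          simp only [List.mem_cons, Prod.mk.injEq]
          rcases hb1 with h1 | h1 | h1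
          · exact Or.inl ⟨h, h1⟩
          · exact Or.inr (Or.inl ⟨h, h1⟩)
          · exact Or.inr (Or.inr (Or.inl ⟨h, h1⟩))
        · have hb1 : b.1 < e.1 := by
            unfold pvIdx at hblt
            rw [h] at hblt
            omega
          have hb1' : b.1 = e.1 - 1 := by omega
          simp only [List.mem_cons, Prod.mk.injEq]
          exact Or.inr (Or.inr (Or.inr (Or.inl ⟨h, hb1'⟩)))
      have hq : (0 ≤ (b.2, b.1).1 && (0 ≤ (b.2, b.1).2 && (b.2, b.1).2 < W)
          && !(pvGetM mask (b.2, b.1).1 (b.2, b.1).2 == 0)) = true := by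
        simp only [Bool.and_eq_true, Bool.not_eq_true', beq_eq_false_iff_ne, decide_eq_true_eq]
        exact ⟨⟨hactb.1.2.2.1, hactb.1.1, hactb.1.2.1⟩, hactb.2⟩
      have := hnbEq (b.2, b.1) hmem hq
      rw [hkeq]
      exact this
    intro a b ha hb hadj
    rcases List.mem_append.1 ha with haP | haE
    · rcases List.mem_append.1 hb with hbP | hbE
      · refine hpres2 _ _ ?_
        rw [hpres1, hpres1]
        exact hC2 a b haP hbP hadj
      · rw [List.mem_singleton] at hbE
        rw [hbE] at hadj ⊢
        exact (hhalf a haP (pvAdj_symm mask H W _ _ hadj)).symm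
    · rw [List.mem_singleton] at haE
      rw [haE] at hadj ⊢
      rcases List.mem_append.1 hb with hbP | hbE
      · exact hhalf b hbP hadj
      · rw [List.mem_singleton] at hbE
        rw [hbE]

lemma ufBuild_inv (mask : List (List Int)) (H W : Int) (hW : 0 < W) :
    ufInv mask H W (pvCells H W)
      ((pvCells H W).foldl (ufStep1 mask W) (PySem.Dict.empty : PySem.Dict Int Int)) := by
  refine pvFoldl_prefix (pvCells H W) (ufStep1 mask W) (ufInv mask H W)
    (fun P e rest s hs hi => ufStep1_inv mask H W P rest e hW hs s hi)
    [] (pvCells H W) _ rfl ?_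
  refine ⟨⟨?_, ?_, ?_, ?_⟩, ?_⟩
  · simp [PySem.Dict.keys_empty]
  · intro k
    rw [PySem.Dict.contains_empty]
    simp
  · intro k p hget
    rw [PySem.Dict.get?_empty] at hget
    cases hget
  · intro a _ p hget
    rw [PySem.Dict.get?_empty] at hget
    cases hget
  · intro a b ha _ _
    cases ha

-- the characterisation of pass 1: equal roots = connected
theorem ufFind_iff_conn (mask : List (List Int)) (H W : Int) (hW : 0 < W)
    (d : PySem.Dict Int Int) (hinv : ufInv mask H W (pvCells H W) d)
    (a b : Int × Int) (ha : pvAct mask H W a) (hb : pvAct mask H W b) :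
    ufFind d (pvIdx W a) = ufFind d (pvIdx W b) ↔ pvConn mask H W a b := by
  obtain ⟨⟨hN, hK, hB, hC1⟩, hC2⟩ := hinv
  constructor
  · intro h
    obtain ⟨a', ha'act, ha'eq, ha'conn⟩ := ufFind_connOf mask H W d hB hC1 _ a ha rfl
    obtain ⟨b', hb'act, hb'eq, hb'conn⟩ := ufFind_connOf mask H W d hB hC1 _ b hb rfl
    have : a' = b' := pvIdx_inj H W a' b' ha'act.1 hb'act.1 (by rw [← ha'eq, ← hb'eq, h])
    subst this
    exact Relation.ReflTransGen.trans ha'conn (pvConn_symm mask H W _ _ hb'conn)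
  · intro h
    induction h with
    | refl => rfl
    | @tail c b' hac hadj ih =>
      have hactc : pvAct mask H W c := hadj.1
      have hactb' : pvAct mask H W b' := hadj.2.1
      rw [ih hactc]
      exact hC2 c b' ((mem_pvCells H W c).2 hactc.1) ((mem_pvCells H W b').2 hactb'.1) hadj

-- ---------- canonical components, leaders, entries ----------
noncomputable def pvConnB (mask : List (List Int)) (H W : Int) (a b : Int × Int) : Bool :=
  @decide (pvConn mask H W a b) (Classical.propDecidable _)
def pvLeader (mask : List (List Int)) (H W : Int) (c : Int × Int) : Prop :=
  pvAct mask H W c ∧ ∀ d, pvConn mask H W c d → pvIdx W c ≤ pvIdx W d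
noncomputable def pvLeadB (mask : List (List Int)) (H W : Int) (c : Int × Int) : Bool :=
  @decide (pvLeader mask H W c) (Classical.propDecidable _)
noncomputable def pvComp (mask : List (List Int)) (H W : Int) (l0 : Int × Int) : List (Int × Int) :=
  (pvCells H W).filter (pvConnB mask H W l0)
noncomputable def pvEntry (mask : List (List Int)) (H W : Int) (l0 : Int × Int) : Int × Int × Int × Int × Int :=
  pvAgg 0 l0.1 l0.1 l0.2 l0.2 (pvComp mask H W l0)

lemma pvConnB_iff (mask : List (List Int)) (H W : Int) (a b : Int × Int) :
    pvConnB mask H W a b = true ↔ pvConn mask H W a b := by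
  unfold pvConnB
  exact @decide_eq_true_iff _ (Classical.propDecidable _)
lemma pvLeadB_iff (mask : List (List Int)) (H W : Int) (c : Int × Int) :
    pvLeadB mask H W c = true ↔ pvLeader mask H W c := by
  unfold pvLeadB
  exact @decide_eq_true_iff _ (Classical.propDecidable _)

lemma pvAgg_perm (l1 l2 : List (Int × Int)) (h : l1.Perm l2) (area mnx mxx mny mxy : Int) :
    pvAgg area mnx mxx mny mxy l1 = pvAgg area mnx mxx mny mxy l2 := by
  rw [pvAgg_spec, pvAgg_spec, h.length_eq,
    List.Perm.foldl_eq (f := min) (h.map Prod.fst) mnx,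
    List.Perm.foldl_eq (f := min) (h.map Prod.snd) mny,
    List.Perm.foldl_eq (f := max) (h.map Prod.fst) mxx,
    List.Perm.foldl_eq (f := max) (h.map Prod.snd) mxy]

-- ---------- the outer scan of A ----------
def pvScanA (mask : List (List Int)) (H W : Int)
    (st : List (List Bool) × List (Int × Int × Int × Int × Int)) (c : Int × Int) :
    List (List Bool) × List (Int × Int × Int × Int × Int) :=
  if pvGetM mask c.2 c.1 == 0 || pvGetS st.1 c.2 c.1 then st
  else
    let st3 := loopA mask H W (pvSetS st.1 c.2 c.1) [(c.1, c.2)] 0 c.1 c.1 c.2 c.2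
    (st3.2, st.2 ++ [st3.1])

def pvInvA (mask : List (List Int)) (H W : Int) (P : List (Int × Int))
    (st : List (List Bool) × List (Int × Int × Int × Int × Int)) : Prop :=
  (∀ c : Int × Int, pvInGrid H W c →
    (pvGetS st.1 c.2 c.1 = true ↔ ∃ d ∈ P, pvAct mask H W d ∧ pvConn mask H W d c)) ∧
  st.2 = (P.filter (pvLeadB mask H W)).map (pvEntry mask H W)

lemma pvScanA_step (mask : List (List Int)) (H W : Int) (P rest : List (Int × Int))
    (e : Int × Int) (hW : 0 < W) (hsplit : pvCells H W = P ++ e :: rest)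
    (st : List (List Bool) × List (Int × Int × Int × Int × Int))
    (hinv : pvInvA mask H W P st) : pvInvA mask H W (P ++ [e]) (pvScanA mask H W st e) := by
  obtain ⟨ex, ey⟩ := e
  obtain ⟨hseen, hout⟩ := hinv
  have hegrid : pvInGrid H W (ex, ey) := (mem_pvCells H W (ex, ey)).1 (by
    rw [hsplit]; exact List.mem_append.2 (Or.inr List.mem_cons_self))
  have hPsub : ∀ d ∈ P, pvInGrid H W d ∧ pvIdx W d < pvIdx W (ex, ey) :=
    fun d hd => (pvCells_split H W P rest (ex, ey) hsplit d).1 hd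
  have hPmem : ∀ d : Int × Int, pvInGrid H W d → pvIdx W d < pvIdx W (ex, ey) → d ∈ P :=
    fun d h1 h2 => (pvCells_split H W P rest (ex, ey) hsplit d).2 ⟨h1, h2⟩
  have hkeepSeen : ∀ st1 : List (List Bool),
      (∀ c : Int × Int, pvInGrid H W c → (pvGetS st1 c.2 c.1 = true ↔
        ∃ d ∈ P, pvAct mask H W d ∧ pvConn mask H W d c)) →
      (∃ d ∈ P, pvAct mask H W d ∧ pvConn mask H W d (ex, ey)) ∨ ¬ pvAct mask H W (ex, ey) →
      (∀ c : Int × Int, pvInGrid H W c → (pvGetS st1 c.2 c.1 = true ↔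
        ∃ d ∈ P ++ [(ex, ey)], pvAct mask H W d ∧ pvConn mask H W d c)) := by
    intro st1 hs1 hcover c hc
    rw [hs1 c hc]
    constructor
    · rintro ⟨d, hd, h1, h2⟩
      exact ⟨d, List.mem_append.2 (Or.inl hd), h1, h2⟩
    · rintro ⟨d, hd, h1, h2⟩
      rcases List.mem_append.1 hd with h | h
      · exact ⟨d, h, h1, h2⟩
      · rw [List.mem_singleton] at h
        subst h
        rcases hcover with ⟨d', hd', h1', h2'⟩ | hna
        · exact ⟨d', hd', h1', Relation.ReflTransGen.trans h2' h2⟩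
        · exact absurd h1 hna
  by_cases hm : pvGetM mask ey ex = 0
  · have hnact : ¬ pvAct mask H W (ex, ey) := fun h => h.2 hm
    have hlf : pvLeadB mask H W (ex, ey) = false := by
      rw [Bool.eq_false_iff]
      intro h
      exact hnact ((pvLeadB_iff mask H W _).1 h).1
    rw [pvScanA, if_pos (by simp [hm])]
    refine ⟨hkeepSeen st.1 hseen (Or.inr hnact), ?_⟩
    rw [List.filter_append, hout, List.map_append]
    simp [List.filter_singleton, hlf]
  · have hact : pvAct mask H W (ex, ey) := ⟨hegrid, hm⟩
    by_cases hs : pvGetS st.1 ey ex = true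
    · -- already seen: skipped, and (ex, ey) is not a leader
      obtain ⟨d, hd, hdact, hdconn⟩ := (hseen (ex, ey) hegrid).1 hs
      have hnl : ¬ pvLeader mask H W (ex, ey) := by
        intro hl
        have := hl.2 d (pvConn_symm mask H W _ _ hdconn)
        have := (hPsub d hd).2
        omega
      have hlf : pvLeadB mask H W (ex, ey) = false := by
        rw [Bool.eq_false_iff]
        intro h
        exact hnl ((pvLeadB_iff mask H W _).1 h)
      rw [pvScanA, if_pos (by simp [hs])]
      refine ⟨hkeepSeen st.1 hseen (Or.inl ⟨d, hd, hdact, hdconn⟩), ?_⟩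
      rw [List.filter_append, hout, List.map_append]
      simp [List.filter_singleton, hlf]
    · -- the flood-fill case: (ex, ey) is the leader of a fresh component
      have hlead : pvLeader mask H W (ex, ey) := by
        refine ⟨hact, fun d hconn => ?_⟩
        by_contra hcon
        have hdact := pvConn_act mask H W _ _ hact hconn
        have hdP : d ∈ P := hPmem d hdact.1 (by omega)
        exact hs ((hseen (ex, ey) hegrid).2
          ⟨d, hdP, hdact, pvConn_symm mask H W _ _ hconn⟩)
      have hlf : pvLeadB mask H W (ex, ey) = true := (pvLeadB_iff mask H W _).2 hlead
      have hunseenC : ∀ dd : Int × Int, pvConn mask H W (ex, ey) dd →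
          pvGetS st.1 dd.2 dd.1 = false := by
        intro dd hconn
        have hddact := pvConn_act mask H W _ _ hact hconn
        cases hval : pvGetS st.1 dd.2 dd.1 with
        | false => rfl
        | true =>
          obtain ⟨d', hd', h1', h2'⟩ := (hseen dd hddact.1).1 hval
          exact absurd ((hseen (ex, ey) hegrid).2 ⟨d', hd', h1',
            Relation.ReflTransGen.trans h2' (pvConn_symm mask H W _ _ hconn)⟩) hs
      obtain ⟨hnd, hpop, hsfin⟩ := pvFlood mask H W st.1 (ex, ey) hact hunseenC
      have hs' : pvGetS st.1 ey ex = false := Bool.eq_false_iff.2 hs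
      have hstep : pvScanA mask H W st (ex, ey)
          = ((pvRun mask H W (pvSetS st.1 ey ex) [(ex, ey)]).2,
             st.2 ++ [pvAgg 0 ex ex ey ey
               (pvRun mask H W (pvSetS st.1 ey ex) [(ex, ey)]).1]) := by
        rw [pvScanA, if_neg (by simp [hm, hs'])]
        rw [loopA_eq mask H W (pvUnseen (pvSetS st.1 ey ex) + 1) _ _ 0 ex ex ey ey (by simp)]
      rw [hstep]
      have hperm : (pvRun mask H W (pvSetS st.1 ey ex) [(ex, ey)]).1.Perm
          (pvComp mask H W (ex, ey)) := by
        refine (List.perm_ext_iff_of_nodup hnd ((pvCells_nodup H W).filter _)).2 ?_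
        intro d
        rw [hpop d, List.mem_filter]
        constructor
        · intro h
          have hdact := pvConn_act mask H W _ _ hact h
          exact ⟨(mem_pvCells H W d).2 hdact.1, (pvConnB_iff mask H W _ _).2 h⟩
        · rintro ⟨_, h⟩
          exact (pvConnB_iff mask H W _ _).1 h
      have hentry : pvAgg 0 ex ex ey ey (pvRun mask H W (pvSetS st.1 ey ex) [(ex, ey)]).1
          = pvEntry mask H W (ex, ey) :=
        pvAgg_perm _ _ hperm 0 ex ex ey ey
      refine ⟨?_, ?_⟩
      · intro c hc
        rw [show pvGetS ((pvRun mask H W (pvSetS st.1 ey ex) [(ex, ey)]).2,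
            st.2 ++ [pvAgg 0 ex ex ey ey
              (pvRun mask H W (pvSetS st.1 ey ex) [(ex, ey)]).1]).1 c.2 c.1
          = pvGetS (pvRun mask H W (pvSetS st.1 ey ex) [(ex, ey)]).2 c.2 c.1 from rfl]
        rw [hsfin c hc.1 hc.2.2.1]
        constructor
        · rintro (h | h)
          · obtain ⟨d, hd, h1, h2⟩ := (hseen c hc).1 h
            exact ⟨d, List.mem_append.2 (Or.inl hd), h1, h2⟩
          · exact ⟨(ex, ey), List.mem_append.2 (Or.inr (by simp)), hact, h⟩
        · rintro ⟨d, hd, h1, h2⟩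
          rcases List.mem_append.1 hd with h | h
          · exact Or.inl ((hseen c hc).2 ⟨d, h, h1, h2⟩)
          · rw [List.mem_singleton] at h
            subst h
            exact Or.inr h2
      · show st.2 ++ [pvAgg 0 ex ex ey ey (pvRun mask H W (pvSetS st.1 ey ex) [(ex, ey)]).1]
          = _
        rw [hentry, List.filter_append, hout, List.map_append]
        simp [List.filter_singleton, hlf]
-- ---------- the second pass of B ----------
def pvStepP (o : Option (Int × Int × Int × Int × Int)) (c : Int × Int) :
    Option (Int × Int × Int × Int × Int) :=
  match o with
  | none => some (1, c.1, c.2, c.1, c.2)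
  | some (a, mnx, mny, mxx, mxy) =>
    some (a + 1, min mnx c.1, min mny c.2, max mxx c.1, max mxy c.2)

def pvAggP (l : List (Int × Int)) : Option (Int × Int × Int × Int × Int) :=
  l.foldl pvStepP none

lemma pvAggP_append_one (l : List (Int × Int)) (c : Int × Int) :
    pvAggP (l ++ [c]) = pvStepP (pvAggP l) c := by
  unfold pvAggP
  rw [List.foldl_append]
  rfl

lemma pvFoldP_some : ∀ (l : List (Int × Int)) (a mnx mny mxx mxy : Int),
    l.foldl pvStepP (some (a, mnx, mny, mxx, mxy))
      = some (pvAgg a mnx mxx mny mxy l) := by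
  intro l
  induction l with
  | nil => intro a mnx mny mxx mxy; rfl
  | cons c t ih =>
    intro a mnx mny mxx mxy
    rw [List.foldl_cons, show pvStepP (some (a, mnx, mny, mxx, mxy)) c
      = some (a + 1, min mnx c.1, min mny c.2, max mxx c.1, max mxy c.2) from rfl, ih]
    rfl

lemma pvAggP_eq_none_iff (l : List (Int × Int)) : pvAggP l = none ↔ l = [] := by
  cases l with
  | nil => simp [pvAggP]
  | cons c t =>
    simp only [pvAggP, List.foldl_cons]
    rw [show pvStepP none c = some (1, c.1, c.2, c.1, c.2) from rfl, pvFoldP_some]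
    simp

def pvScanB (mask : List (List Int)) (H W : Int) (par : PySem.Dict Int Int)
    (st : PySem.Dict Int (Int × Int × Int × Int × Int) × List Int) (c : Int × Int) :
    PySem.Dict Int (Int × Int × Int × Int × Int) × List Int :=
  if pvGetM mask c.2 c.1 == 0 then st
  else
    let rt := ufFind par (c.2 * W + c.1)
    match PySem.Dict.get? st.1 rt with
    | some (a, mnx, mny, mxx, mxy) =>
      (PySem.Dict.insert st.1 rt (a + 1, min mnx c.1, min mny c.2, max mxx c.1, max mxy c.2),
        st.2)
    | none => (PySem.Dict.insert st.1 rt (1, c.1, c.2, c.1, c.2), st.2 ++ [rt])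

def pvInvB (mask : List (List Int)) (H W : Int) (par : PySem.Dict Int Int)
    (P : List (Int × Int)) (st : PySem.Dict Int (Int × Int × Int × Int × Int) × List Int) :
    Prop :=
  (∀ a : Int × Int, pvAct mask H W a →
     PySem.Dict.get? st.1 (ufFind par (pvIdx W a))
       = pvAggP (P.filter (pvConnB mask H W a))) ∧
  st.2 = (P.filter (pvLeadB mask H W)).map (fun l0 => ufFind par (pvIdx W l0))

lemma pvScanB_step (mask : List (List Int)) (H W : Int) (par : PySem.Dict Int Int)
    (hW : 0 < W)
    (hchar : ∀ a b : Int × Int, pvAct mask H W a → pvAct mask H W b →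
      (ufFind par (pvIdx W a) = ufFind par (pvIdx W b) ↔ pvConn mask H W a b))
    (P rest : List (Int × Int)) (e : Int × Int) (hsplit : pvCells H W = P ++ e :: rest)
    (st : PySem.Dict Int (Int × Int × Int × Int × Int) × List Int)
    (hinv : pvInvB mask H W par P st) :
    pvInvB mask H W par (P ++ [e]) (pvScanB mask H W par st e) := by
  obtain ⟨ex, ey⟩ := e
  obtain ⟨hO2, hO1⟩ := hinv
  have hegrid : pvInGrid H W (ex, ey) := (mem_pvCells H W (ex, ey)).1 (by
    rw [hsplit]; exact List.mem_append.2 (Or.inr List.mem_cons_self))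
  by_cases hm : pvGetM mask ey ex = 0
  · have hnact : ¬ pvAct mask H W (ex, ey) := fun h => h.2 hm
    have hlf : pvLeadB mask H W (ex, ey) = false := by
      rw [Bool.eq_false_iff]
      intro h
      exact hnact ((pvLeadB_iff mask H W _).1 h).1
    rw [pvScanB, if_pos (by simp [hm])]
    refine ⟨?_, ?_⟩
    · intro a hacta
      have hcf : pvConnB mask H W a (ex, ey) = false := by
        rw [Bool.eq_false_iff]
        intro h
        exact hnact (pvConn_act mask H W _ _ hacta ((pvConnB_iff mask H W _ _).1 h))
      rw [List.filter_append, hO2 a hacta]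
      simp [List.filter_singleton, hcf]
    · rw [List.filter_append, hO1, List.map_append]
      simp [List.filter_singleton, hlf]
  · have hact : pvAct mask H W (ex, ey) := ⟨hegrid, hm⟩
    have hkeq : pvIdx W (ex, ey) = ey * W + ex := rfl
    have hPe := hO2 (ex, ey) hact
    cases hagg : pvAggP (P.filter (pvConnB mask H W (ex, ey))) with
    | none =>
      -- no earlier cell of this component: (ex, ey) is its leader, a fresh root is emitted
      have hfilnil : P.filter (pvConnB mask H W (ex, ey)) = [] :=
        (pvAggP_eq_none_iff _).1 hagg
      have hlead : pvLeader mask H W (ex, ey) := by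
        refine ⟨hact, fun d hconn => ?_⟩
        by_contra hcon
        have hdact := pvConn_act mask H W _ _ hact hconn
        have hdP : d ∈ P := (pvCells_split H W P rest (ex, ey) hsplit d).2
          ⟨hdact.1, by omega⟩
        have : d ∈ P.filter (pvConnB mask H W (ex, ey)) :=
          List.mem_filter.2 ⟨hdP, (pvConnB_iff mask H W _ _).2 hconn⟩
        rw [hfilnil] at this
        cases this
      have hlf : pvLeadB mask H W (ex, ey) = true := (pvLeadB_iff mask H W _).2 hlead
      have hget : PySem.Dict.get? st.1 (ufFind par (ey * W + ex)) = none := by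
        rw [← hkeq, hPe, hagg]
      have hstep : pvScanB mask H W par st (ex, ey)
          = (PySem.Dict.insert st.1 (ufFind par (ey * W + ex)) (1, ex, ey, ex, ey),
             st.2 ++ [ufFind par (ey * W + ex)]) := by
        rw [pvScanB, if_neg (by simp [hm])]
        simp only [hget]
      rw [hstep]
      refine ⟨?_, ?_⟩
      · intro a hacta
        by_cases hconn : pvConn mask H W a (ex, ey)
        · have hfeq : ufFind par (pvIdx W a) = ufFind par (ey * W + ex) := by
            rw [← hkeq]
            exact (hchar a (ex, ey) hacta hact).2 hconn
          rw [show (PySem.Dict.insert st.1 (ufFind par (ey * W + ex))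
              (1, ex, ey, ex, ey), st.2 ++ [ufFind par (ey * W + ex)]).1
            = PySem.Dict.insert st.1 (ufFind par (ey * W + ex)) (1, ex, ey, ex, ey) from rfl]
          rw [hfeq, PySem.Dict.get?_insert_self]
          have hconne : pvConnB mask H W a (ex, ey) = true :=
            (pvConnB_iff mask H W _ _).2 hconn
          rw [List.filter_append]
          rw [show List.filter (pvConnB mask H W a) [(ex, ey)] = [(ex, ey)] by
            simp [List.filter_singleton, hconne]]
          rw [pvAggP_append_one]
          -- the filtered prefix must be empty too: a and (ex, ey) share the component
          have hpref : P.filter (pvConnB mask H W a) = [] := by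
            cases hl : P.filter (pvConnB mask H W a) with
            | nil => rfl
            | cons q t =>
              have hq : q ∈ P.filter (pvConnB mask H W a) := by rw [hl]; simp
              obtain ⟨hqP, hqc⟩ := List.mem_filter.1 hq
              have hqconn : pvConn mask H W a q := (pvConnB_iff mask H W _ _).1 hqc
              have : q ∈ P.filter (pvConnB mask H W (ex, ey)) :=
                List.mem_filter.2 ⟨hqP, (pvConnB_iff mask H W _ _).2
                  (Relation.ReflTransGen.trans (pvConn_symm mask H W _ _ hconn) hqconn)⟩
              rw [hfilnil] at this
              cases this
          rw [hpref]
          rfl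
        · have hfne : ufFind par (pvIdx W a) ≠ ufFind par (ey * W + ex) := by
            rw [← hkeq]
            intro h
            exact hconn ((hchar a (ex, ey) hacta hact).1 h)
          have hcf : pvConnB mask H W a (ex, ey) = false := by
            rw [Bool.eq_false_iff]
            intro h
            exact hconn ((pvConnB_iff mask H W _ _).1 h)
          rw [show (PySem.Dict.insert st.1 (ufFind par (ey * W + ex))
              (1, ex, ey, ex, ey), st.2 ++ [ufFind par (ey * W + ex)]).1
            = PySem.Dict.insert st.1 (ufFind par (ey * W + ex)) (1, ex, ey, ex, ey) from rfl]
          rw [PySem.Dict.get?_insert, if_neg hfne, hO2 a hacta, List.filter_append]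
          simp [List.filter_singleton, hcf]
      · rw [List.filter_append, hO1, List.map_append]
        simp [List.filter_singleton, hlf, hkeq]
    | some t =>
      obtain ⟨a0, mnx, mny, mxx, mxy⟩ := t
      -- an earlier cell of the component exists: not a leader, the root entry is updated
      have hfilne : P.filter (pvConnB mask H W (ex, ey)) ≠ [] := by
        intro h
        rw [h] at hagg
        cases hagg
      have hnl : ¬ pvLeader mask H W (ex, ey) := by
        intro hl
        refine hfilne (List.filter_eq_nil_iff.2 ?_)
        intro d hdP
        rw [Bool.not_eq_true, Bool.eq_false_iff]
        intro hc
        have hconn := (pvConnB_iff mask H W _ _).1 hc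
        have := hl.2 d hconn
        have := ((pvCells_split H W P rest (ex, ey) hsplit d).1 hdP).2
        omega
      have hlf : pvLeadB mask H W (ex, ey) = false := by
        rw [Bool.eq_false_iff]
        intro h
        exact hnl ((pvLeadB_iff mask H W _).1 h)
      have hget : PySem.Dict.get? st.1 (ufFind par (ey * W + ex))
          = some (a0, mnx, mny, mxx, mxy) := by
        rw [← hkeq, hPe, hagg]
      have hstep : pvScanB mask H W par st (ex, ey)
          = (PySem.Dict.insert st.1 (ufFind par (ey * W + ex))
              (a0 + 1, min mnx ex, min mny ey, max mxx ex, max mxy ey), st.2) := by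
        rw [pvScanB, if_neg (by simp [hm])]
        simp only [hget]
      rw [hstep]
      refine ⟨?_, ?_⟩
      · intro a hacta
        by_cases hconn : pvConn mask H W a (ex, ey)
        · have hfeq : ufFind par (pvIdx W a) = ufFind par (ey * W + ex) := by
            rw [← hkeq]
            exact (hchar a (ex, ey) hacta hact).2 hconn
          have hsame : pvAggP (P.filter (pvConnB mask H W a))
              = some (a0, mnx, mny, mxx, mxy) := by
            rw [← hO2 a hacta, hfeq, hget]
          have hconne : pvConnB mask H W a (ex, ey) = true :=
            (pvConnB_iff mask H W _ _).2 hconn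
          rw [show (PySem.Dict.insert st.1 (ufFind par (ey * W + ex))
              (a0 + 1, min mnx ex, min mny ey, max mxx ex, max mxy ey), st.2).1
            = PySem.Dict.insert st.1 (ufFind par (ey * W + ex))
              (a0 + 1, min mnx ex, min mny ey, max mxx ex, max mxy ey) from rfl]
          rw [hfeq, PySem.Dict.get?_insert_self, List.filter_append]
          rw [show List.filter (pvConnB mask H W a) [(ex, ey)] = [(ex, ey)] by
            simp [List.filter_singleton, hconne]]
          rw [pvAggP_append_one, hsame]
          rfl
        · have hfne : ufFind par (pvIdx W a) ≠ ufFind par (ey * W + ex) := by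
            rw [← hkeq]
            intro h
            exact hconn ((hchar a (ex, ey) hacta hact).1 h)
          have hcf : pvConnB mask H W a (ex, ey) = false := by
            rw [Bool.eq_false_iff]
            intro h
            exact hconn ((pvConnB_iff mask H W _ _).1 h)
          rw [show (PySem.Dict.insert st.1 (ufFind par (ey * W + ex))
              (a0 + 1, min mnx ex, min mny ey, max mxx ex, max mxy ey), st.2).1
            = PySem.Dict.insert st.1 (ufFind par (ey * W + ex))
              (a0 + 1, min mnx ex, min mny ey, max mxx ex, max mxy ey) from rfl]
          rw [PySem.Dict.get?_insert, if_neg hfne, hO2 a hacta, List.filter_append]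
          simp [List.filter_singleton, hcf]
      · rw [List.filter_append, hO1, List.map_append]
        simp [List.filter_singleton, hlf]

-- ---------- final assembly ----------
lemma pvSeen0 (H W y x : Int) (hx : 0 ≤ x) (hxW : x < W) (hy : 0 ≤ y) (hyH : y < H) :
    pvGetS ((PySem.List.pyRange 0 H 1).map (fun _ => PySem.List.pyRepeat [false] W)) y x
      = false := by
  unfold pvGetS
  have hlen : ((PySem.List.pyRange 0 H 1).map fun _ => PySem.List.pyRepeat [false] W).length
      = H.toNat := by
    rw [List.length_map, PySem.List.length_pyRange_one]
    omega
  have hrow : ((PySem.List.pyRange 0 H 1).map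
      (fun _ => PySem.List.pyRepeat [false] W)).getD y.toNat []
      = PySem.List.pyRepeat [false] W := by
    rw [List.getD_eq_getElem _ _ (by rw [hlen]; omega)]
    rw [List.getElem_map]
  rw [hrow, PySem.List.pyRepeat_singleton]
  rw [List.getD_eq_getElem _ _ (by rw [List.length_replicate]; omega)]
  simp

lemma pvEntry_aggP (mask : List (List Int)) (H W : Int) (l0 : Int × Int)
    (hlead : pvLeader mask H W l0) :
    pvAggP (pvComp mask H W l0) = some (pvEntry mask H W l0) := by
  obtain ⟨s, t, hsplit⟩ := List.append_of_mem ((mem_pvCells H W l0).2 hlead.1.1)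
  have hfil : s.filter (pvConnB mask H W l0) = [] := by
    refine List.filter_eq_nil_iff.2 ?_
    intro d hd
    rw [Bool.not_eq_true, Bool.eq_false_iff]
    intro hc
    have hconn := (pvConnB_iff mask H W _ _).1 hc
    have h1 := hlead.2 d hconn
    have h2 := ((pvCells_split H W s t l0 hsplit d).1 hd).2
    omega
  have hself : pvConnB mask H W l0 l0 = true :=
    (pvConnB_iff mask H W _ _).2 Relation.ReflTransGen.refl
  have hcomp : pvComp mask H W l0 = l0 :: t.filter (pvConnB mask H W l0) := by
    show (pvCells H W).filter (pvConnB mask H W l0) = _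
    rw [hsplit, List.filter_append, hfil, List.filter_cons_of_pos hself, List.nil_append]
  have hentry : pvEntry mask H W l0
      = pvAgg 1 l0.1 l0.1 l0.2 l0.2 (t.filter (pvConnB mask H W l0)) := by
    show pvAgg 0 l0.1 l0.1 l0.2 l0.2 (pvComp mask H W l0) = _
    rw [hcomp]
    rw [show pvAgg 0 l0.1 l0.1 l0.2 l0.2 (l0 :: t.filter (pvConnB mask H W l0))
      = pvAgg (0 + 1) (min l0.1 l0.1) (max l0.1 l0.1) (min l0.2 l0.2) (max l0.2 l0.2)
        (t.filter (pvConnB mask H W l0)) from rfl]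
    simp [min_self, max_self]
  rw [hcomp, hentry]
  show List.foldl pvStepP (pvStepP none l0) (t.filter (pvConnB mask H W l0)) = _
  rw [show pvStepP none l0 = some (1, l0.1, l0.2, l0.1, l0.2) from rfl, pvFoldP_some]

theorem find_components_eq (mask : List (List Int)) :
    find_components mask = find_components_alt mask := by
  by_cases hempty : (mask.isEmpty || (mask.headD []).isEmpty) = true
  · rw [find_components, find_components_alt, if_pos hempty, if_pos hempty]
  · rw [Bool.or_eq_true, not_or] at hempty
    obtain ⟨he1, he2⟩ := hempty
    have hempty : ¬ (mask.isEmpty || (mask.headD []).isEmpty) = true := by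
      rw [Bool.or_eq_true, not_or]
      exact ⟨he1, he2⟩
    set Hm : Int := (mask.length : Int) with hHdef
    set Wm : Int := ((mask.headD []).length : Int) with hWdef
    have hW : 0 < Wm := by
      rw [Bool.not_eq_true, List.isEmpty_eq_false_iff] at he2
      have := List.length_pos_of_ne_nil he2
      omega
    set parC : PySem.Dict Int Int :=
      (pvCells Hm Wm).foldl (ufStep1 mask Wm) PySem.Dict.empty with hparC
    have hA : find_components mask
        = ((pvCells Hm Wm).foldl (pvScanA mask Hm Wm)
            ((PySem.List.pyRange 0 Hm 1).map (fun _ => PySem.List.pyRepeat [false] Wm),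
              [])).2 := by
      rw [find_components, if_neg hempty]
      simp only [pvFoldl_cells]
      rfl
    have hB : find_components_alt mask
        = (((pvCells Hm Wm).foldl (pvScanB mask Hm Wm parC) (PySem.Dict.empty, [])).2).map
            (fun rt => PySem.Dict.getD
              ((pvCells Hm Wm).foldl (pvScanB mask Hm Wm parC) (PySem.Dict.empty, [])).1 rt
              (0, 0, 0, 0, 0)) := by
      rw [find_components_alt, if_neg hempty]
      simp only [pvFoldl_cells]
      rfl
    have hbaseA : pvInvA mask Hm Wm []
        ((PySem.List.pyRange 0 Hm 1).map (fun _ => PySem.List.pyRepeat [false] Wm), []) := by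
      refine ⟨?_, rfl⟩
      intro c hc
      rw [show ((PySem.List.pyRange 0 Hm 1).map (fun _ => PySem.List.pyRepeat [false] Wm),
        ([] : List (Int × Int × Int × Int × Int))).1
        = (PySem.List.pyRange 0 Hm 1).map (fun _ => PySem.List.pyRepeat [false] Wm) from rfl]
      rw [pvSeen0 Hm Wm c.2 c.1 hc.1 hc.2.1 hc.2.2.1 hc.2.2.2]
      simp
    have hInvA := pvFoldl_prefix (pvCells Hm Wm) (pvScanA mask Hm Wm) (pvInvA mask Hm Wm)
      (fun P e rest s hs hi => pvScanA_step mask Hm Wm P rest e hW hs s hi)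
      [] (pvCells Hm Wm) _ rfl hbaseA
    have hinvUF := ufBuild_inv mask Hm Wm hW
    have hchar : ∀ a b : Int × Int, pvAct mask Hm Wm a → pvAct mask Hm Wm b →
        (ufFind parC (pvIdx Wm a) = ufFind parC (pvIdx Wm b) ↔ pvConn mask Hm Wm a b) :=
      fun a b ha hb => ufFind_iff_conn mask Hm Wm hW parC hinvUF a b ha hb
    have hbaseB : pvInvB mask Hm Wm parC [] (PySem.Dict.empty, []) := by
      refine ⟨?_, rfl⟩
      intro a _
      rw [PySem.Dict.get?_empty]
      rfl
    have hInvB := pvFoldl_prefix (pvCells Hm Wm) (pvScanB mask Hm Wm parC)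
      (pvInvB mask Hm Wm parC)
      (fun P e rest s hs hi => pvScanB_step mask Hm Wm parC hW hchar P rest e hs s hi)
      [] (pvCells Hm Wm) _ rfl hbaseB
    rw [hA, hB, hInvA.2, hInvB.2, List.map_map]
    refine List.map_congr_left ?_
    intro l0 hl0
    have hlead : pvLeader mask Hm Wm l0 :=
      (pvLeadB_iff mask Hm Wm l0).1 (List.of_mem_filter hl0)
    have hget := hInvB.1 l0 hlead.1
    rw [show pvAggP ((pvCells Hm Wm).filter (pvConnB mask Hm Wm l0))
      = pvAggP (pvComp mask Hm Wm l0) from rfl, pvEntry_aggP mask Hm Wm l0 hlead] at hget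
    have hfin : PySem.Dict.getD
        ((pvCells Hm Wm).foldl (pvScanB mask Hm Wm parC) (PySem.Dict.empty, [])).1
        (ufFind parC (pvIdx Wm l0)) (0, 0, 0, 0, 0) = pvEntry mask Hm Wm l0 := by
      rw [PySem.Dict.getD_eq_get?_getD, hget]
      rfl
    exact hfin.symm

-- ===== VERDICT =====
theorem find_components_spec : Claim_equal_find_components := by
  intro mask _ _
  unfold Spec_find_components
  exact find_components_eq mask
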